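-- pv_equiv track=rewrite | github.com/PaulaFont/TFG_cluster | pipeline/voting_system.py | _perform_voting_on_aligned_tokens
-- ===== SOURCE A (Python) =====
-- from collections import Counter
-- from collections import Counter
--
-- def _perform_voting_on_aligned_tokens(aligned_versions_tokens,
--                                      placeholder_token_padding, # Renamed for clarity
--                                      tie_breaker_version_idx,
--                                      tie_resolution_strategy='prefer_version_idx',
--                                      tie_placeholder_output="[AMBIGUOUS]"): # New placeholder for ties
--     """Performs column-wise majority voting on aligned token lists."""
--     if not aligned_versions_tokens or not aligned_versions_tokens[0]:
--         return []
--
--     final_harmonized_tokens = []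
--     num_aligned_positions = len(aligned_versions_tokens[0])
--     num_versions = len(aligned_versions_tokens)
--
--     for j in range(num_aligned_positions): # Iterate column by column
--         column_tokens_for_vote = []
--         original_indices_in_vote = []
--
--         for i in range(num_versions):
--             if j < len(aligned_versions_tokens[i]):
--                 token = aligned_versions_tokens[i][j]
--                 if token != placeholder_token_padding: # Exclude padding placeholders from vote
--                     column_tokens_for_vote.append(token)
--                     original_indices_in_vote.append(i)
--
--         if column_tokens_for_vote:
--             counts = Counter(column_tokens_for_vote)
--             top_tokens_with_counts = counts.most_common()
--
--             if not top_tokens_with_counts: continue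
--
--             # Check for a clear winner (not a tie for the top spot)
--             is_tie_for_top = len(top_tokens_with_counts) > 1 and \
--                              top_tokens_with_counts[0][1] == top_tokens_with_counts[1][1]
--
--             if not is_tie_for_top: # Clear winner
--                 winner_token = top_tokens_with_counts[0][0]
--                 final_harmonized_tokens.append(winner_token)
--             else: # Tie for the top spot
--                 if tie_resolution_strategy == 'prefer_version_idx':
--                     tied_candidates = [tc[0] for tc in top_tokens_with_counts if tc[1] == top_tokens_with_counts[0][1]]
--                     winner_token = top_tokens_with_counts[0][0] # Default winner before tie-breaking
--
--                     found_preferred_winner = False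
--                     for k_idx, orig_v_idx in enumerate(original_indices_in_vote):
--                         # Check if the token at this position in the original vote list
--                         # belongs to the preferred tie_breaker_version_idx AND is one of the tied top candidates
--                         if orig_v_idx == tie_breaker_version_idx and column_tokens_for_vote[k_idx] in tied_candidates:
--                             winner_token = column_tokens_for_vote[k_idx]
--                             found_preferred_winner = True
--                             break
--
--                     if not found_preferred_winner:
--                         min_original_idx_for_tie = float('inf')
--                         # Iterate through tied candidates and find the one from the earliest original version
--                         for tc_candidate in tied_candidates:
--                             for k_idx, orig_v_idx in enumerate(original_indices_in_vote):
--                                 if column_tokens_for_vote[k_idx] == tc_candidate: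
--                                     if orig_v_idx < min_original_idx_for_tie:
--                                         min_original_idx_for_tie = orig_v_idx
--                                         winner_token = tc_candidate
--                                     break # Found first occurrence of this tc_candidate
--                     final_harmonized_tokens.append(winner_token)
--
--                 elif tie_resolution_strategy == 'omit':
--                     pass # Do nothing, effectively omitting the token at this position
--
--                 elif tie_resolution_strategy == 'placeholder':
--                     final_harmonized_tokens.append(tie_placeholder_output)
--
--                 else: # Default to preferring version index if strategy is unknown
--                     # (This part is a fallback, ideally strategy is validated earlier)
--                     winner_token = top_tokens_with_counts[0][0] # Fallback, could reuse 'prefer_version_idx' logic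
--                     final_harmonized_tokens.append(winner_token)
--
--     return final_harmonized_tokens
-- ===== SOURCE B (Python) =====
-- def _perform_voting_on_aligned_tokens(aligned_versions_tokens,
--                                       placeholder_token_padding,
--                                       tie_breaker_version_idx,
--                                       tie_resolution_strategy='prefer_version_idx',
--                                       tie_placeholder_output="[AMBIGUOUS]"):
--     """Sort-and-group voting: each column's (token, version) votes are sorted and
--     counted as run lengths, and the winner is chosen by one max() with a composite
--     key (count, is-the-tie-breaker-version's-token, earliest contributing version),
--     replacing Counter/most_common and the nested tie-break scans."""
--     if not aligned_versions_tokens or not aligned_versions_tokens[0]: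
--         return []
--     num_versions = len(aligned_versions_tokens)
--     result = []
--     for j in range(len(aligned_versions_tokens[0])):
--         pairs = sorted((row[j], i)
--                        for i, row in enumerate(aligned_versions_tokens)
--                        if j < len(row) and row[j] != placeholder_token_padding)
--         if not pairs:
--             continue
--         groups = []  # (token, count, earliest contributing version)
--         k = 0
--         while k < len(pairs):
--             m = k
--             while m < len(pairs) and pairs[m][0] == pairs[k][0]:
--                 m += 1
--             groups.append((pairs[k][0], m - k, pairs[k][1]))
--             k = m
--         maxc = max(g[1] for g in groups)
--         tied = sum(1 for g in groups if g[1] == maxc) > 1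
--         if tied and tie_resolution_strategy == 'omit':
--             continue
--         if tied and tie_resolution_strategy == 'placeholder':
--             result.append(tie_placeholder_output)
--             continue
--         trusted_token = None
--         if tie_resolution_strategy == 'prefer_version_idx' and 0 <= tie_breaker_version_idx < num_versions:
--             trusted_row = aligned_versions_tokens[tie_breaker_version_idx]
--             if j < len(trusted_row) and trusted_row[j] != placeholder_token_padding:
--                 trusted_token = trusted_row[j]
--         result.append(max(groups,
--                           key=lambda g: (g[1], g[0] == trusted_token, -g[2]))[0])
--     return result
-- ===== Notes on version B (the rewrite author's own statement) =====
-- stated objective: alternative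
-- what changed: Replaced Counter+most_common (hash counting plus a stable reverse sort per column) and the two nested tie-break scans by sort-and-group: each column's (token, version) votes are sorted, counted as run lengths carrying the earliest contributing version, and the winner is one max() with the composite key (count, is the tie-breaker version's token, -earliest version); the tie-breaker's token comes from a direct indexed lookup instead of a scan.
import Mathlib
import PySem

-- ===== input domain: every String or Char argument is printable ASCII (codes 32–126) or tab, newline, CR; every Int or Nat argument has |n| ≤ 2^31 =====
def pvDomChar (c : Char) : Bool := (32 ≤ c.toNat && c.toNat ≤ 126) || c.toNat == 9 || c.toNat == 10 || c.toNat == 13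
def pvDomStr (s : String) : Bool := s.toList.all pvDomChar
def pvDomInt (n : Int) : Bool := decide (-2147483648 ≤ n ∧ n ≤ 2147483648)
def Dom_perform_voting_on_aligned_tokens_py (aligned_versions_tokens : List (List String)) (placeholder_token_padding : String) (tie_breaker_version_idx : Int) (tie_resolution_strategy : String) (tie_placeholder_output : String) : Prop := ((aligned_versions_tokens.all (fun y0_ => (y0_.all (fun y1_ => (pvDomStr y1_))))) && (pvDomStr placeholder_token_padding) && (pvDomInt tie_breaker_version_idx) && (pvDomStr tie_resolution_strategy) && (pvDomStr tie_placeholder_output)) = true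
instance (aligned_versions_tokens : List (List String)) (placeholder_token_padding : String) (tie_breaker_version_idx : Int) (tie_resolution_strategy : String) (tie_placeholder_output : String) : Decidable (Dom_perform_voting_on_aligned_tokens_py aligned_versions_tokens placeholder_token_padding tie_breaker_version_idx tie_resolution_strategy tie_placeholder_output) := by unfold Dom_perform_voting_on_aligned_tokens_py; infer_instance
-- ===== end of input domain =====

-- B replaces Counter+most_common and the nested tie-break scans by sort-and-group per
-- column plus one max() with a composite key; equal return values (alternative algorithm).
-- ===== PORT A =====
def aGather (avt : List (List String)) (pad : String) (j : Int) : List String × List Int :=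
  (PySem.List.pyRange 0 (PySem.List.len avt) 1).foldl
    (fun (s : List String × List Int) i =>
      let row := PySem.List.pyGetD avt i []
      if j < PySem.List.len row then
        let token := PySem.List.pyGetD row j ""   -- avt[i][j]; guarded by j < len(row), i in range
        if token ≠ pad then (s.1 ++ [token], s.2 ++ [i]) else s
      else s)
    ([], [])

-- the 'for k_idx, orig_v_idx in enumerate(original_indices_in_vote): ... break' scan, walking both parallel lists in step
def aFindPref (toks : List String) (idxs : List Int) (tb : Int) (tied : List String) : Option String :=
  match toks, idxs with
  | tok :: ts, i :: is_ => if i == tb && decide (tok ∈ tied) then some tok else aFindPref ts is_ tb tied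
  | _, _ => none

-- inner 'for k_idx, ...: if column_tokens_for_vote[k_idx] == tc_candidate: ...; break' — first index whose token is tc
def aFirstIdx (toks : List String) (idxs : List Int) (tc : String) : Option Int :=
  match toks, idxs with
  | tok :: ts, i :: is_ => if tok == tc then some i else aFirstIdx ts is_ tc
  | _, _ => none

-- one step of the fallback loop over tied candidates; Option Int models min_original_idx = float('inf') (none = inf)
def aFallbackStep (toks : List String) (idxs : List Int) (s : String × Option Int) (tc : String) : String × Option Int :=
  match aFirstIdx toks idxs tc with
  | none => s
  | some i => if (match s.2 with | none => true | some m => decide (i < m)) then (tc, some i) else s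

def aFallback (toks : List String) (idxs : List Int) (tied : List String) (w0 : String) : String :=
  (tied.foldl (aFallbackStep toks idxs) (w0, none)).1

-- the body of A's 'for j in range(num_aligned_positions)' loop
def aColStep (avt : List (List String)) (pad : String) (tb : Int) (strat tiePh : String)
    (acc : List String) (j : Int) : List String :=
  let g := aGather avt pad j
  if g.1 = [] then acc
  else
    let counts := PySem.Dict.counter g.1
    -- counts.most_common() = sorted(counts.items(), key=itemgetter(1), reverse=True)
    let mc := PySem.List.sorted counts.items (fun p => p.2) true
    match mc with
    | [] => acc          -- 'if not top_tokens_with_counts: continue'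
    | (t0, c0) :: rest =>
      let isTie := decide (mc.length > 1) && (match rest with | [] => false | (_, c1) :: _ => c1 == c0)
      if isTie = false then acc ++ [t0]
      else if strat == "prefer_version_idx" then
        let tied := (mc.filter (fun tc => tc.2 == c0)).map (fun tc => tc.1)
        match aFindPref g.1 g.2 tb tied with
        | some w => acc ++ [w]
        | none => acc ++ [aFallback g.1 g.2 tied t0]
      else if strat == "omit" then acc
      else if strat == "placeholder" then acc ++ [tiePh]
      else acc ++ [t0]

def perform_voting_on_aligned_tokens_py (aligned_versions_tokens : List (List String)) (placeholder_token_padding : String) (tie_breaker_version_idx : Int) (tie_resolution_strategy : String) (tie_placeholder_output : String) : List String :=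
  match aligned_versions_tokens with
  | [] => []
  | row0 :: _ =>
    if row0 = [] then []
    else
      (PySem.List.pyRange 0 (PySem.List.len row0) 1).foldl
        (aColStep aligned_versions_tokens placeholder_token_padding tie_breaker_version_idx tie_resolution_strategy tie_placeholder_output)
        []

-- ===== PORT B =====
-- sorted((row[j], i) for i, row in enumerate(avt) if j < len(row) and row[j] != pad):
-- Python's keyless tuple sort = sorted2 with the two tuple components as keys
def bPairs (avt : List (List String)) (pad : String) (j : Int) : List (String × Int) :=
  PySem.List.sorted2
    (((PySem.List.enumerate avt 0).filter
        (fun p => decide (j < PySem.List.len p.2) && decide (PySem.List.pyGetD p.2 j "" ≠ pad))).map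
      (fun p => (PySem.List.pyGetD p.2 j "", p.1)))
    (fun q => q.1) (fun q => q.2) false

-- the two nested 'while' loops building groups: a run of equal tokens becomes
-- (token, run length, version index of the run's first pair)
def bGroups : List (String × Int) → List (String × Int × Int)
  | [] => []
  | (t, i) :: rest =>
    (t, (1 + (rest.takeWhile (fun q => q.1 == t)).length : Int), i)
      :: bGroups (rest.dropWhile (fun q => q.1 == t))
termination_by l => l.length
decreasing_by
  simp only [List.length_cons]
  exact Nat.lt_succ_of_le (List.length_dropWhile_le _ _)

-- g[0] == trusted_token where trusted_token may be None: a str never equals None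
def bFlag (tr : Option String) (t : String) : Bool :=
  match tr with
  | some s => t == s
  | none => false

-- key(g) > key(best) for the 3-tuple key (count, flag, -earliest): ported by hand,
-- exact: Python compares tuples lexicographically component by component
def bKeyGt (tr : Option String) (g best : String × Int × Int) : Bool :=
  decide (best.2.1 < g.2.1) ||
    (g.2.1 == best.2.1 &&
      ((!bFlag tr best.1 && bFlag tr g.1) ||
        (bFlag tr g.1 == bFlag tr best.1 && decide (-g.2.2 > -best.2.2))))

-- max(groups, key=...): Python keeps the FIRST element with the maximal key
def bMaxBy (tr : Option String) (g0 : String × Int × Int) (gs : List (String × Int × Int)) :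
    String × Int × Int :=
  gs.foldl (fun best g => if bKeyGt tr g best then g else best) g0

-- the body of B's 'for j in range(len(aligned_versions_tokens[0]))' loop
def bColStep (avt : List (List String)) (pad : String) (tb : Int) (strat tiePh : String)
    (acc : List String) (j : Int) : List String :=
  let pairs := bPairs avt pad j
  match pairs with
  | [] => acc   -- 'if not pairs: continue'
  | p :: ps =>
    let groups := bGroups (p :: ps)
    let maxc := (PySem.List.max? (groups.map (fun g => g.2.1)) (fun c => c)).getD 0  -- max(...): groups nonempty here
    let tied := decide (((groups.filter (fun g => g.2.1 == maxc)).map (fun _ => (1 : Int))).sum > 1)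
    if tied && strat == "omit" then acc
    else if tied && strat == "placeholder" then acc ++ [tiePh]
    else
      let trusted : Option String :=
        if strat == "prefer_version_idx" && decide (0 ≤ tb) && decide (tb < PySem.List.len avt) then
          let trow := PySem.List.pyGetD avt tb []   -- avt[tb]; 0 <= tb < len(avt) here
          if decide (j < PySem.List.len trow) && decide (PySem.List.pyGetD trow j "" ≠ pad) then
            some (PySem.List.pyGetD trow j "")
          else none
        else none
      match groups with
      | [] => acc   -- unreachable: pairs nonempty
      | g0 :: gs => acc ++ [(bMaxBy trusted g0 gs).1]

def perform_voting_on_aligned_tokens_py_alt (aligned_versions_tokens : List (List String)) (placeholder_token_padding : String) (tie_breaker_version_idx : Int) (tie_resolution_strategy : String) (tie_placeholder_output : String) : List String :=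
  match aligned_versions_tokens with
  | [] => []
  | row0 :: _ =>
    if row0 = [] then []
    else
      (PySem.List.pyRange 0 (PySem.List.len row0) 1).foldl
        (bColStep aligned_versions_tokens placeholder_token_padding tie_breaker_version_idx tie_resolution_strategy tie_placeholder_output)
        []

-- ===== PRECONDITION & SPEC =====
def Spec_perform_voting_on_aligned_tokens_py (aligned_versions_tokens : List (List String)) (placeholder_token_padding : String) (tie_breaker_version_idx : Int) (tie_resolution_strategy : String) (tie_placeholder_output : String) (out : List String) : Prop := out = perform_voting_on_aligned_tokens_py_alt aligned_versions_tokens placeholder_token_padding tie_breaker_version_idx tie_resolution_strategy tie_placeholder_output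
instance (aligned_versions_tokens : List (List String)) (placeholder_token_padding : String) (tie_breaker_version_idx : Int) (tie_resolution_strategy : String) (tie_placeholder_output : String) (out : List String) : Decidable (Spec_perform_voting_on_aligned_tokens_py aligned_versions_tokens placeholder_token_padding tie_breaker_version_idx tie_resolution_strategy tie_placeholder_output out) := by unfold Spec_perform_voting_on_aligned_tokens_py; infer_instance

-- ===== CLAIM (what is proved, stated in full; the proofs are below) =====
def Claim_equal_perform_voting_on_aligned_tokens_py : Prop := ∀ (aligned_versions_tokens : List (List String)) (placeholder_token_padding : String) (tie_breaker_version_idx : Int) (tie_resolution_strategy : String) (tie_placeholder_output : String), Dom_perform_voting_on_aligned_tokens_py aligned_versions_tokens placeholder_token_padding tie_breaker_version_idx tie_resolution_strategy tie_placeholder_output → Spec_perform_voting_on_aligned_tokens_py aligned_versions_tokens placeholder_token_padding tie_breaker_version_idx tie_resolution_strategy tie_placeholder_output (perform_voting_on_aligned_tokens_py aligned_versions_tokens placeholder_token_padding tie_breaker_version_idx tie_resolution_strategy tie_placeholder_output)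

-- ===== LEMMAS AND PROOFS =====

-- the per-column "vote list": (token, version index) pairs, padding excluded
def colCond (pad : String) (j : Int) (p : Int × List String) : Bool :=
  decide (j < PySem.List.len p.2) && decide (PySem.List.pyGetD p.2 j "" ≠ pad)

def votesOf (pad : String) (j : Int) (l : List (Int × List String)) : List (String × Int) :=
  (l.filter (colCond pad j)).map (fun p => (PySem.List.pyGetD p.2 j "", p.1))

def aPairStep (pad : String) (j : Int) (s : List String × List Int) (p : Int × List String) :
    List String × List Int :=
  if j < PySem.List.len p.2 then
    let token := PySem.List.pyGetD p.2 j ""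
    if token ≠ pad then (s.1 ++ [token], s.2 ++ [p.1]) else s
  else s

-- proof-side reference formulation of one column: counter + first-occurrence top list
-- + the tie-breaker version's token (the "natural middle" both ports are compared to)
def specPairStep (pad : String) (tb : Int) (j : Int) (s : PySem.Dict String Int × Option String)
    (p : Int × List String) : PySem.Dict String Int × Option String :=
  if j < PySem.List.len p.2 then
    let tok := PySem.List.pyGetD p.2 j ""
    if tok ≠ pad then
      (s.1.insert tok (s.1.getD tok 0 + 1), if p.1 == tb then some tok else s.2)
    else s
  else s

def specGather (avt : List (List String)) (pad : String) (tb : Int) (j : Int) :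
    PySem.Dict String Int × Option String :=
  (PySem.List.enumerate avt 0).foldl (specPairStep pad tb j) (PySem.Dict.empty, none)

def specColStep (avt : List (List String)) (pad : String) (tb : Int) (strat tiePh : String)
    (acc : List String) (j : Int) : List String :=
  let g := specGather avt pad tb j
  if g.1.items = [] then acc
  else
    let maxc := (PySem.List.max? g.1.values (fun c => c)).getD 0
    let top := (g.1.items.filter (fun p => p.2 == maxc)).map (fun p => p.1)
    if top.length == 1 then acc ++ [PySem.List.pyGetD top 0 ""]
    else if strat == "omit" then acc
    else if strat == "placeholder" then acc ++ [tiePh]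
    else if strat == "prefer_version_idx"
            && (match g.2 with | some t => decide (t ∈ top) | none => false) then
      acc ++ [g.2.getD ""]
    else acc ++ [PySem.List.pyGetD top 0 ""]

def lastTb (tb : Int) (votes : List (String × Int)) (s : Option String) : Option String :=
  votes.foldl (fun t v => if v.2 == tb then some v.1 else t) s

theorem gatherA_fold (pad : String) (j : Int) :
    ∀ (l : List (Int × List String)) (s : List String × List Int),
      l.foldl (aPairStep pad j) s
        = (s.1 ++ (votesOf pad j l).map Prod.fst, s.2 ++ (votesOf pad j l).map Prod.snd) := by
  intro l
  induction l with
  | nil => intro s; simp [votesOf]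
  | cons p l ih =>
    intro s
    simp only [List.foldl_cons, aPairStep]
    by_cases h1 : j < PySem.List.len p.2
    · by_cases h2 : PySem.List.pyGetD p.2 j "" ≠ pad
      · simp only [if_pos h1, if_pos h2, ih]
        rw [PySem.List.len_eq] at h1
        simp [votesOf, colCond, h1, h2]
      · simp only [if_pos h1, if_neg h2, ih]
        rw [PySem.List.len_eq] at h1
        simp [votesOf, colCond, h1, h2]
    · simp only [if_neg h1, ih]
      rw [PySem.List.len_eq] at h1
      simp [votesOf, colCond, h1]

theorem aGather_eq (avt : List (List String)) (pad : String) (j : Int) :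
    aGather avt pad j
      = ((votesOf pad j (PySem.List.enumerate avt 0)).map Prod.fst,
         (votesOf pad j (PySem.List.enumerate avt 0)).map Prod.snd) := by
  have h := gatherA_fold pad j (PySem.List.enumerate avt 0) ([], [])
  conv at h => lhs; rw [PySem.List.enumerate_eq_map_pyRange avt ([] : List String), List.foldl_map]
  simp only [List.nil_append] at h
  exact h

theorem gatherSpec_fold (pad : String) (tb : Int) (j : Int) :
    ∀ (l : List (Int × List String)) (s : PySem.Dict String Int × Option String),
      l.foldl (specPairStep pad tb j) s
        = (((votesOf pad j l).map Prod.fst).foldl (fun d t => d.insert t (d.getD t 0 + 1)) s.1,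
           lastTb tb (votesOf pad j l) s.2) := by
  intro l
  induction l with
  | nil => intro s; simp [votesOf, lastTb]
  | cons p l ih =>
    intro s
    simp only [List.foldl_cons, specPairStep]
    by_cases h1 : j < PySem.List.len p.2
    · by_cases h2 : PySem.List.pyGetD p.2 j "" ≠ pad
      · simp only [if_pos h1, if_pos h2, ih]
        rw [PySem.List.len_eq] at h1
        simp [votesOf, colCond, h1, h2, lastTb]
      · simp only [if_pos h1, if_neg h2, ih]
        rw [PySem.List.len_eq] at h1
        simp [votesOf, colCond, h1, h2]
    · simp only [if_neg h1, ih]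
      rw [PySem.List.len_eq] at h1
      simp [votesOf, colCond, h1]

theorem specGather_eq (avt : List (List String)) (pad : String) (tb : Int) (j : Int) :
    specGather avt pad tb j
      = (PySem.Dict.counter ((votesOf pad j (PySem.List.enumerate avt 0)).map Prod.fst),
         lastTb tb (votesOf pad j (PySem.List.enumerate avt 0)) none) := by
  have hb : specGather avt pad tb j
      = (PySem.List.enumerate avt 0).foldl (specPairStep pad tb j) (PySem.Dict.empty, none) := rfl
  rw [hb, gatherSpec_fold, PySem.Dict.foldl_insert_getD_add_one_eq_counter]

-- head of Python's stable reverse sort: everything strictly before it in the source has a smaller key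
theorem head_sorted_rev_stable {α κ : Type} [LinearOrder κ] (xs : List α) (key : α → κ) :
    ∀ (m : α) (t : List α), PySem.List.sorted xs key true = m :: t →
      ∃ pre suf, xs = pre ++ m :: suf ∧ ∀ y ∈ pre, key y < key m := by
  induction xs using List.reverseRecOn with
  | nil =>
    intro m t h
    rw [(PySem.List.sorted_eq_nil_iff ([] : List α) key true).mpr rfl] at h
    cases h
  | append_singleton xs x ih =>
    intro m t h
    rw [PySem.List.sorted_rev_eq_foldl_insertBy, List.foldl_append, List.foldl_cons,
      List.foldl_nil, ← PySem.List.sorted_rev_eq_foldl_insertBy] at h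
    cases hF : PySem.List.sorted xs key true with
    | nil =>
      have hx : xs = [] := (PySem.List.sorted_eq_nil_iff xs key true).mp hF
      subst hx
      rw [hF] at h
      have hmx : m = x := by
        have : PySem.List.insertBy (fun a b => decide (key b < key a)) x [] = [x] := rfl
        rw [this] at h
        exact (List.cons.injEq ..).mp h |>.1.symm
      subst hmx
      exact ⟨[], [], rfl, by intro y hy; cases hy⟩
    | cons m' t' =>
      rw [hF] at h
      by_cases hk : key m' < key x
      · have hins : PySem.List.insertBy (fun a b => decide (key b < key a)) x (m' :: t')
            = x :: m' :: t' := by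
          show (if decide (key m' < key x) = true then _ else _) = _
          simp [hk]
        rw [hins] at h
        have hmx : m = x := ((List.cons.injEq ..).mp h).1.symm
        subst hmx
        refine ⟨xs, [], rfl, ?_⟩
        intro y hy
        exact lt_of_le_of_lt (PySem.List.key_head_sorted_rev_ge xs key hF y hy) hk
      · have hins : PySem.List.insertBy (fun a b => decide (key b < key a)) x (m' :: t')
            = m' :: PySem.List.insertBy (fun a b => decide (key b < key a)) x t' := by
          show (if decide (key m' < key x) = true then _ else _) = _
          simp [hk]
        rw [hins] at h
        have hmx : m = m' := ((List.cons.injEq ..).mp h).1.symm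
        subst hmx
        obtain ⟨pre, suf, hxs, hpre⟩ := ih m t' hF
        exact ⟨pre, suf ++ [x], by rw [hxs]; simp, hpre⟩

-- set(xs) lists tokens in order of first occurrence
theorem ofList_pairwise_idxOf {α : Type} [BEq α] [LawfulBEq α] (xs : List α) :
    (PySem.Set.ofList xs).Pairwise (fun a b => xs.idxOf a < xs.idxOf b) := by
  induction xs using List.reverseRecOn with
  | nil => simp [PySem.Set.ofList_nil]
  | append_singleton xs x ih =>
    rw [PySem.Set.ofList_append_singleton]
    have hsame : ∀ a ∈ PySem.Set.ofList xs, (xs ++ [x]).idxOf a = xs.idxOf a := by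
      intro a ha
      exact List.idxOf_append_of_mem ((PySem.Set.mem_ofList ..).mp ha)
    by_cases hx : x ∈ xs
    · rw [PySem.Set.add_of_mem ((PySem.Set.mem_ofList ..).mpr hx)]
      exact ih.imp_of_mem (fun ha hb hr => by rw [hsame _ ha, hsame _ hb]; exact hr)
    · rw [PySem.Set.add_of_not_mem (by simp [PySem.Set.mem_ofList, hx])]
      rw [List.pairwise_append]
      refine ⟨ih.imp_of_mem (fun ha hb hr => by rw [hsame _ ha, hsame _ hb]; exact hr),
        List.pairwise_singleton .., ?_⟩
      intro a ha b hb
      rw [List.mem_singleton] at hb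
      have hbx : (xs ++ [x]).idxOf b = xs.length := by
        rw [hb, List.idxOf_append]
        simp [List.idxOf_eq_length_iff.2 hx]
      rw [hsame a ha, hbx]
      exact List.idxOf_lt_length_of_mem ((PySem.Set.mem_ofList ..).mp ha)

theorem aFirstIdx_eq (votes : List (String × Int)) (tc : String) :
    aFirstIdx (votes.map Prod.fst) (votes.map Prod.snd) tc
      = (votes.find? (fun v => v.1 == tc)).map Prod.snd := by
  induction votes with
  | nil => rfl
  | cons v vs ih =>
    obtain ⟨t, i⟩ := v
    by_cases h : t == tc
    · simp [aFirstIdx, h]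
    · simp [aFirstIdx, h, ih]

theorem aFindPref_eq (votes : List (String × Int)) (tb : Int) (tied : List String) :
    aFindPref (votes.map Prod.fst) (votes.map Prod.snd) tb tied
      = (votes.find? (fun v => v.2 == tb && decide (v.1 ∈ tied))).map Prod.fst := by
  induction votes with
  | nil => rfl
  | cons v vs ih =>
    obtain ⟨t, i⟩ := v
    by_cases h : (i == tb && decide (t ∈ tied)) = true
    · simp [aFindPref, h]
    · simp [aFindPref, h, ih]

theorem lastTb_stay (tb : Int) (l : List (String × Int)) (s : Option String)
    (h : ∀ v ∈ l, (v.2 == tb) = false) : lastTb tb l s = s := by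
  induction l generalizing s with
  | nil => rfl
  | cons v vs ih =>
    have hv := h v (List.mem_cons_self ..)
    simp only [lastTb, List.foldl_cons, hv, Bool.false_eq_true, if_false]
    exact ih _ (fun u hu => h u (List.mem_cons_of_mem _ hu))

theorem lastTb_eq_find (tb : Int) (l : List (String × Int))
    (hinc : (l.map Prod.snd).Pairwise (· < ·)) :
    lastTb tb l none = (l.find? (fun v => v.2 == tb)).map Prod.fst := by
  induction l with
  | nil => rfl
  | cons v vs ih =>
    rw [List.map_cons, List.pairwise_cons] at hinc
    by_cases h : v.2 == tb
    · have hno : ∀ u ∈ vs, (u.2 == tb) = false := by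
        intro u hu
        have h1 : v.2 < u.2 := hinc.1 u.2 (List.mem_map_of_mem hu)
        have h2 : v.2 = tb := by simpa [beq_iff_eq] using h
        simp []; omega
      simp only [lastTb, List.foldl_cons, h, if_true, List.find?_cons, Option.map_some]
      exact lastTb_stay tb vs (some v.1) hno
    · simp only [lastTb, List.foldl_cons, h, Bool.false_eq_true, if_false, List.find?_cons]
      exact ih hinc.2

theorem find_conj_none (tb : Int) (l : List (String × Int)) (p : String × Int → Bool)
    (h : l.find? (fun v => v.2 == tb) = none) :
    l.find? (fun v => v.2 == tb && p v) = none := by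
  rw [List.find?_eq_none] at h ⊢
  intro x hx
  simp only [Bool.and_eq_true, not_and]
  intro hxtb
  exact absurd hxtb (h x hx)

theorem find_conj_some (tb : Int) (l : List (String × Int)) (p : String × Int → Bool)
    (hinc : (l.map Prod.snd).Pairwise (· < ·)) (v : String × Int)
    (h : l.find? (fun v => v.2 == tb) = some v) :
    l.find? (fun u => u.2 == tb && p u) = if p v then some v else none := by
  rw [List.find?_eq_some_iff_append] at h
  obtain ⟨htb, as, bs, rfl, has⟩ := h
  have hpl : (as ++ v :: bs).Pairwise (fun a b : String × Int => a.2 < b.2) := by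
    rw [← List.pairwise_map (f := Prod.snd)]; exact hinc
  have hbs : ∀ b ∈ bs, (b.2 == tb) = false := by
    intro b hb
    have h1 : v.2 < b.2 := (List.pairwise_cons.mp (List.pairwise_append.mp hpl).2.1).1 b hb
    have h2 : v.2 = tb := by simpa [beq_iff_eq] using htb
    simp []; omega
  rw [List.find?_append]
  have h1 : List.find? (fun u => u.2 == tb && p u) as = none := by
    rw [List.find?_eq_none]
    intro x hx
    simp only [Bool.and_eq_true, not_and]
    intro hxtb
    have := has x hx
    simp_all
  rw [h1, Option.none_or, List.find?_cons]
  by_cases hp : p v = true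
  · simp [htb, hp]
  · have h2 : List.find? (fun u => u.2 == tb && p u) bs = none := by
      rw [List.find?_eq_none]; intro x hx; simp [hbs x hx]
    simp [htb, hp, h2]

theorem aFallback_stay (toks : List String) (idxs : List Int) (w : String) (i0 : Int)
    (l : List String)
    (h : ∀ tc ∈ l, ∀ i, aFirstIdx toks idxs tc = some i → ¬ i < i0) :
    l.foldl (aFallbackStep toks idxs) (w, some i0) = (w, some i0) := by
  induction l with
  | nil => rfl
  | cons tc l ih =>
    have step : aFallbackStep toks idxs (w, some i0) tc = (w, some i0) := by
      unfold aFallbackStep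
      cases hfi : aFirstIdx toks idxs tc with
      | none => rfl
      | some i =>
        have := h tc (List.mem_cons_self ..) i hfi
        simp [this]
    rw [List.foldl_cons, step]
    exact ih (fun tc htc i hfi => h tc (List.mem_cons_of_mem _ htc) i hfi)

theorem aFallback_main (toks : List String) (idxs : List Int) (t0 : String) (i0 : Int)
    (hf0 : aFirstIdx toks idxs t0 = some i0) :
    ∀ (l : List String), t0 ∈ l →
      (∀ tc ∈ l, tc ≠ t0 → ∃ i, aFirstIdx toks idxs tc = some i ∧ i0 < i) →
      ∀ w m, (m = none ∨ ∃ v, m = some v ∧ i0 < v) →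
      (l.foldl (aFallbackStep toks idxs) (w, m)).1 = t0 := by
  intro l
  induction l with
  | nil => intro h; cases h
  | cons x l ih =>
    intro hmem hl w m hm
    rw [List.foldl_cons]
    by_cases hx : x = t0
    · subst hx
      have hstep : aFallbackStep toks idxs (w, m) x = (x, some i0) := by
        unfold aFallbackStep
        rw [hf0]
        rcases hm with rfl | ⟨v, rfl, hv⟩
        · simp
        · simp [hv]
      rw [hstep]
      have hstay := aFallback_stay toks idxs x i0 l (by
        intro tc htc i hfi
        by_cases htc0 : tc = x
        · subst htc0
          rw [hf0] at hfi
          injection hfi with hh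
          omega
        · obtain ⟨i', hfi', hlt⟩ := hl tc (List.mem_cons_of_mem _ htc) htc0
          rw [hfi'] at hfi
          injection hfi with hh
          omega)
      rw [hstay]
    · obtain ⟨i, hfi, hlt⟩ := hl x (List.mem_cons_self ..) hx
      have hmem' : t0 ∈ l := by
        rcases List.mem_cons.mp hmem with h | h
        · exact absurd h.symm hx
        · exact h
      have hl' : ∀ tc ∈ l, tc ≠ t0 → ∃ i, aFirstIdx toks idxs tc = some i ∧ i0 < i :=
        fun tc htc => hl tc (List.mem_cons_of_mem _ htc)
      simp only [aFallbackStep, hfi]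
      by_cases hcond : (match (w, m).2 with | none => true | some mv => decide (i < mv)) = true
      · rw [if_pos hcond]
        exact ih hmem' hl' x (some i) (Or.inr ⟨i, rfl, hlt⟩)
      · rw [if_neg hcond]
        exact ih hmem' hl' w m hm

theorem votes_snd_pairwise (avt : List (List String)) (pad : String) (j : Int) :
    ((votesOf pad j (PySem.List.enumerate avt 0)).map Prod.snd).Pairwise (· < ·) := by
  unfold votesOf
  rw [List.map_map, List.pairwise_map]
  have h := (PySem.List.pairwise_lt_enumerate avt 0).filter (colCond pad j)
  exact h.imp (fun hab => hab)

theorem find_fst_some (votes : List (String × Int)) (tc : String)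
    (h : tc ∈ votes.map Prod.fst) :
    ∃ v, votes.find? (fun u => u.1 == tc) = some v ∧ v.1 = tc := by
  obtain ⟨u, hu, hue⟩ := List.mem_map.mp h
  have hsome : (votes.find? (fun u => u.1 == tc)).isSome :=
    List.find?_isSome.mpr ⟨u, hu, by simp [hue]⟩
  obtain ⟨v, hv⟩ := Option.isSome_iff_exists.mp hsome
  exact ⟨v, hv, by simpa [beq_iff_eq] using List.find?_some hv⟩

theorem idxOf_fst_eq_findIdx (votes : List (String × Int)) (a : String) :
    (votes.map Prod.fst).idxOf a = votes.findIdx (fun u => u.1 == a) := by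
  show (votes.map Prod.fst).findIdx (· == a) = _
  rw [List.findIdx_map]
  rfl

theorem find_fst_snd_lt (votes : List (String × Int))
    (hinc : (votes.map Prod.snd).Pairwise (· < ·)) (a b : String)
    (hab : (votes.map Prod.fst).idxOf a < (votes.map Prod.fst).idxOf b)
    (va vb : String × Int)
    (hfa : votes.find? (fun u => u.1 == a) = some va)
    (hfb : votes.find? (fun u => u.1 == b) = some vb) : va.2 < vb.2 := by
  rw [List.find?_eq_getElem?_findIdx] at hfa hfb
  obtain ⟨hlta, heqa⟩ := List.getElem?_eq_some_iff.mp hfa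
  obtain ⟨hltb, heqb⟩ := List.getElem?_eq_some_iff.mp hfb
  rw [idxOf_fst_eq_findIdx, idxOf_fst_eq_findIdx] at hab
  have hp := List.pairwise_iff_getElem.mp hinc
    (votes.findIdx (fun u => u.1 == a)) (votes.findIdx (fun u => u.1 == b))
    (by simpa using hlta) (by simpa using hltb) hab
  simpa [List.getElem_map, heqa, heqb] using hp

theorem colA_eq (avt : List (List String)) (pad : String) (tb : Int) (strat tiePh : String)
    (acc : List String) (j : Int) :
    aColStep avt pad tb strat tiePh acc j = specColStep avt pad tb strat tiePh acc j := by
  have hinc := votes_snd_pairwise avt pad j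
  unfold aColStep specColStep
  rw [aGather_eq, specGather_eq]
  set votes := votesOf pad j (PySem.List.enumerate avt 0) with hvdef
  dsimp only
  by_cases hnil : votes.map Prod.fst = []
  · simp [hnil, PySem.Dict.items_counter, PySem.Set.ofList_nil]
  · -- nonempty column
    have hS : PySem.Set.ofList (votes.map Prod.fst) ≠ [] := by
      intro hS0
      obtain ⟨a, l, htk⟩ : ∃ a l, votes.map Prod.fst = a :: l := by
        cases htk : votes.map Prod.fst with
        | nil => exact absurd htk hnil
        | cons a l => exact ⟨a, l, rfl⟩
      have ha : a ∈ PySem.Set.ofList (votes.map Prod.fst) :=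
        (PySem.Set.mem_ofList ..).mpr (by rw [htk]; exact List.mem_cons_self ..)
      rw [hS0] at ha
      cases ha
    have hitems := PySem.Dict.items_counter (votes.map Prod.fst)
    have hitems_ne : (PySem.Dict.counter (votes.map Prod.fst)).items ≠ [] := by
      rw [hitems]
      simpa using hS
    rw [if_neg hnil, if_neg hitems_ne]
    cases hmc : PySem.List.sorted (PySem.Dict.counter (votes.map Prod.fst)).items
        (fun p => p.2) true with
    | nil => exact absurd ((PySem.List.sorted_eq_nil_iff ..).mp hmc) hitems_ne
    | cons hd rest =>
    obtain ⟨t0, c0⟩ := hd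
    dsimp only
    have hperm : ((t0, c0) :: rest).Perm (PySem.Dict.counter (votes.map Prod.fst)).items := by
      have := PySem.List.sorted_perm (PySem.Dict.counter (votes.map Prod.fst)).items
        (fun p => p.2) true
      rwa [hmc] at this
    have hhd_mem : (t0, c0) ∈ (PySem.Dict.counter (votes.map Prod.fst)).items :=
      hperm.mem_iff.mp (List.mem_cons_self ..)
    have ht0S : t0 ∈ PySem.Set.ofList (votes.map Prod.fst)
        ∧ c0 = ((votes.map Prod.fst).count t0 : Int) := by
      rw [hitems] at hhd_mem
      obtain ⟨k, hk, hke⟩ := List.mem_map.mp hhd_mem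
      obtain ⟨hk1, hk2⟩ := Prod.mk.injEq .. |>.mp hke
      exact ⟨hk1 ▸ hk, by rw [← hk2, hk1]⟩
    have hmax : ∀ y ∈ (PySem.Dict.counter (votes.map Prod.fst)).items, y.2 ≤ c0 :=
      PySem.List.key_head_sorted_rev_ge _ _ hmc
    obtain ⟨pre, suf, hdecomp, hpre⟩ :=
      head_sorted_rev_stable (PySem.Dict.counter (votes.map Prod.fst)).items
        (fun p => p.2) (t0, c0) rest hmc
    -- the max of the values is c0
    have hvals : (PySem.Dict.counter (votes.map Prod.fst)).values
        = (PySem.Dict.counter (votes.map Prod.fst)).items.map Prod.snd := rfl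
    obtain ⟨v, hv⟩ : ∃ v, PySem.List.max?
        (PySem.Dict.counter (votes.map Prod.fst)).values (fun c => c) = some v := by
      cases hv0 : PySem.List.max? (PySem.Dict.counter (votes.map Prod.fst)).values
          (fun c => c) with
      | none =>
        rw [PySem.List.max?_eq_none_iff, hvals, List.map_eq_nil_iff] at hv0
        exact absurd hv0 hitems_ne
      | some v => exact ⟨v, rfl⟩
    have hvc0 : v = c0 := by
      have h1 : v ≤ c0 := by
        have hvm := PySem.List.max?_mem hv
        rw [hvals] at hvm
        obtain ⟨y, hy, hye⟩ := List.mem_map.mp hvm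
        exact hye ▸ hmax y hy
      have h2 : c0 ≤ v := PySem.List.max?_isMax hv c0
        (by rw [hvals]; exact List.mem_map_of_mem hhd_mem)
      omega
    rw [hv]
    have hgetd : (some v).getD 0 = c0 := by simp [hvc0]
    rw [hgetd]
    -- top = t0 :: …
    have hfilpre : pre.filter (fun p => p.2 == c0) = [] := by
      rw [List.filter_eq_nil_iff]
      intro y hy
      have := hpre y hy
      simp only [beq_iff_eq]
      omega
    have htop : ((PySem.Dict.counter (votes.map Prod.fst)).items.filter
          (fun p => p.2 == c0)).map (fun p => p.1)
        = t0 :: ((suf.filter (fun p => p.2 == c0)).map (fun p => p.1)) := by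
      rw [hdecomp, List.filter_append, hfilpre, List.filter_cons]
      simp
    have htoplen : ((PySem.Dict.counter (votes.map Prod.fst)).items.filter
          (fun p => p.2 == c0)).length
        = ((t0, c0) :: rest).countP (fun p => p.2 == c0) := by
      rw [← List.countP_eq_length_filter]
      exact (hperm.countP_eq _).symm
    cases rest with
    | nil =>
      rw [htop]
      have h1 : (t0 :: ((suf.filter (fun p => p.2 == c0)).map (fun p => p.1))).length = 1 := by
        rw [← htop, List.length_map, htoplen]
        simp
      have h2 : (suf.filter (fun p => p.2 == c0)).map (fun p => p.1) = [] := by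
        simp only [List.length_cons] at h1
        exact List.length_eq_zero_iff.mp (by omega)
      rw [h2]
      simp [PySem.List.pyGetD_zero_cons]
    | cons hd1 rest2 =>
    obtain ⟨t1, c1⟩ := hd1
    dsimp only
    have hpw := PySem.List.sorted_pairwise_rev
      (PySem.Dict.counter (votes.map Prod.fst)).items (fun p => p.2)
    rw [hmc] at hpw
    have h01 : ∀ y ∈ (t1, c1) :: rest2, y.2 ≤ c0 := (List.pairwise_cons.mp hpw).1
    have h12 : ∀ y ∈ rest2, y.2 ≤ c1 :=
      (List.pairwise_cons.mp (List.pairwise_cons.mp hpw).2).1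
    by_cases htie : c1 = c0
    · -- tie for the top spot
      subst htie
      have hbn : (((PySem.Dict.counter (votes.map Prod.fst)).items.filter
            (fun p => p.2 == c1))).length ≠ 1 := by
        rw [htoplen, List.countP_cons, List.countP_cons]
        simp
      have hmemtt : ∀ x : String,
          x ∈ (((t0, c1) :: (t1, c1) :: rest2).filter (fun tc => tc.2 == c1)).map
              (fun tc => tc.1)
          ↔ x ∈ (((PySem.Dict.counter (votes.map Prod.fst)).items.filter
              (fun p => p.2 == c1)).map (fun p => p.1)) := by
        intro x
        exact ((hperm.filter _).map _).mem_iff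
      by_cases hP : strat = "prefer_version_idx"
      · subst hP
        -- membership / ordering groundwork for the tie-break and fallback scans
        have htied_prop : ∀ tc ∈ (((t0, c1) :: (t1, c1) :: rest2).filter
              (fun tc => tc.2 == c1)).map (fun tc => tc.1),
            tc ∈ PySem.Set.ofList (votes.map Prod.fst)
              ∧ ((votes.map Prod.fst).count tc : Int) = c1 := by
          intro tc htc
          obtain ⟨pair, hpf, hpe⟩ := List.mem_map.mp htc
          have hp1 := List.mem_of_mem_filter hpf
          have hp2 := List.of_mem_filter hpf
          have hpi : pair ∈ (PySem.Dict.counter (votes.map Prod.fst)).items :=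
            hperm.mem_iff.mp hp1
          rw [hitems] at hpi
          obtain ⟨k, hk, hke⟩ := List.mem_map.mp hpi
          obtain ⟨hk1, hk2⟩ := Prod.mk.injEq .. |>.mp hke
          have hkc : k = tc := by rw [← hpe, ← hke]
          subst hkc
          refine ⟨hk, ?_⟩
          rw [hk2]
          simpa [beq_iff_eq] using hp2
        have hdecS := hdecomp
        rw [hitems] at hdecS
        obtain ⟨s1, s2', hs, hm1, hm2⟩ := List.map_eq_append_iff.mp hdecS
        obtain ⟨k0, s2, hs2, hk0, hm2'⟩ := List.map_eq_cons_iff.mp hm2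
        have hk0t : k0 = t0 := (Prod.mk.injEq .. |>.mp hk0).1
        rw [hs2, hk0t] at hs
        have hs1lt : ∀ k ∈ s1, ((votes.map Prod.fst).count k : Int) < c1 := by
          intro k hk
          have : ((k, ((votes.map Prod.fst).count k : Int))) ∈ pre := by
            rw [← hm1]; exact List.mem_map_of_mem hk
          exact hpre _ this
        have hSpw := ofList_pairwise_idxOf (votes.map Prod.fst)
        rw [hs] at hSpw
        have hidx : ∀ tc ∈ s2, (votes.map Prod.fst).idxOf t0 < (votes.map Prod.fst).idxOf tc :=
          (List.pairwise_cons.mp (List.pairwise_append.mp hSpw).2.1).1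
        have htc_s2 : ∀ tc ∈ (((t0, c1) :: (t1, c1) :: rest2).filter
              (fun tc => tc.2 == c1)).map (fun tc => tc.1), tc ≠ t0 → tc ∈ s2 := by
          intro tc htc hne
          obtain ⟨hcS, hcc⟩ := htied_prop tc htc
          rw [hs] at hcS
          rcases List.mem_append.mp hcS with h | h
          · exact absurd hcc (by have := hs1lt tc h; omega)
          · rcases List.mem_cons.mp h with h | h
            · exact absurd h hne
            · exact h
        obtain ⟨va, hva, hva1⟩ := find_fst_some votes t0
          ((PySem.Set.mem_ofList ..).mp ht0S.1)
        have hf0 : aFirstIdx (votes.map Prod.fst) (votes.map Prod.snd) t0 = some va.2 := by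
          rw [aFirstIdx_eq, hva]; rfl
        have hlall : ∀ tc ∈ (((t0, c1) :: (t1, c1) :: rest2).filter
              (fun tc => tc.2 == c1)).map (fun tc => tc.1), tc ≠ t0 →
            ∃ i, aFirstIdx (votes.map Prod.fst) (votes.map Prod.snd) tc = some i ∧ va.2 < i := by
          intro tc htc hne
          obtain ⟨hcS, _⟩ := htied_prop tc htc
          obtain ⟨vc, hvc, hvc1⟩ := find_fst_some votes tc ((PySem.Set.mem_ofList ..).mp hcS)
          refine ⟨vc.2, by rw [aFirstIdx_eq, hvc]; rfl, ?_⟩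
          exact find_fst_snd_lt votes hinc t0 tc (hidx tc (htc_s2 tc htc hne)) va vc hva hvc
        have ht0tied : t0 ∈ (((t0, c1) :: (t1, c1) :: rest2).filter
            (fun tc => tc.2 == c1)).map (fun tc => tc.1) := by
          simp []
        have hfb : aFallback (votes.map Prod.fst) (votes.map Prod.snd)
            ((((t0, c1) :: (t1, c1) :: rest2).filter (fun tc => tc.2 == c1)).map
              (fun tc => tc.1)) t0 = t0 :=
          aFallback_main _ _ t0 va.2 hf0 _ ht0tied hlall t0 none (Or.inl rfl)
        rw [lastTb_eq_find tb votes hinc, aFindPref_eq votes tb]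
        cases hf : votes.find? (fun v => v.2 == tb) with
        | none =>
          rw [find_conj_none tb votes _ hf]
          simp [htop, PySem.List.pyGetD_zero_cons]
          simpa [List.filter_cons] using hfb
        | some v =>
          rw [find_conj_some tb votes
            (fun u => decide (u.1 ∈ (((t0, c1) :: (t1, c1) :: rest2).filter
              (fun tc => tc.2 == c1)).map (fun tc => tc.1))) hinc v hf]
          by_cases hvt : v.1 ∈ (((t0, c1) :: (t1, c1) :: rest2).filter
              (fun tc => tc.2 == c1)).map (fun tc => tc.1)
          · have hvtop := (hmemtt v.1).mp hvt
            have hvt2 : v.1 = t0 ∨ v.1 = t1 ∨ (v.1, c1) ∈ rest2 := by simpa using hvt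
            have hvtop2 : (v.1, c1) ∈ (PySem.Dict.counter (List.map Prod.fst votes)).items := by
              simpa using hvtop
            simp [hbn, hvt2, hvtop2]
          · have hvtop : v.1 ∉ (((PySem.Dict.counter (votes.map Prod.fst)).items.filter
                (fun p => p.2 == c1)).map (fun p => p.1)) := fun h => hvt ((hmemtt v.1).mpr h)
            have hvt2 : ¬(v.1 = t0 ∨ v.1 = t1 ∨ (v.1, c1) ∈ rest2) := by simpa using hvt
            have hvtop2 : ¬(v.1 = t0 ∨ (v.1, c1) ∈ suf) := by simpa [htop] using hvtop
            simp [hvt2, hvtop2, htop, PySem.List.pyGetD_zero_cons]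
            simpa using hfb
      · have hPb := beq_eq_false_iff_ne.mpr hP
        by_cases hO : strat = "omit"
        · subst hO
          simp [hbn, hPb]
        · have hOb := beq_eq_false_iff_ne.mpr hO
          by_cases hPl : strat = "placeholder"
          · subst hPl
            simp [hbn, hPb, hOb]
          · have hPlb := beq_eq_false_iff_ne.mpr hPl
            simp [hPb, hOb, hPlb, htop, PySem.List.pyGetD_zero_cons]
    · -- clear winner despite length > 1
      have hc1lt : c1 < c0 :=
        lt_of_le_of_ne (h01 (t1, c1) (List.mem_cons_self ..)) htie
      have hcnt : ((t0, c0) :: (t1, c1) :: rest2).countP (fun p => p.2 == c0) = 1 := by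
        rw [List.countP_cons, List.countP_cons]
        have hr2 : rest2.countP (fun p => p.2 == c0) = 0 := by
          rw [List.countP_eq_zero]
          intro y hy
          have := h12 y hy
          simp only [beq_iff_eq]
          omega
        simp [hr2, htie]
      rw [htop]
      have h1 : (t0 :: ((suf.filter (fun p => p.2 == c0)).map (fun p => p.1))).length = 1 := by
        rw [← htop, List.length_map, htoplen, hcnt]
      have h2 : (suf.filter (fun p => p.2 == c0)).map (fun p => p.1) = [] := by
        simp only [List.length_cons] at h1
        exact List.length_eq_zero_iff.mp (by omega)
      rw [h2]
      have hbe : ((c1 == c0) : Bool) = false := beq_eq_false_iff_ne.mpr htie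
      simp [PySem.List.pyGetD_zero_cons, hbe]

-- ======== B-side lemmas: sort-and-group = counter + first-occurrence selection ========

-- the strict lexicographic order Python uses on the (token, version) tuples
def lexLt (a b : String × Int) : Prop := a.1 < b.1 ∨ (a.1 = b.1 ∧ a.2 < b.2)

def lexLtb (a b : String × Int) : Bool :=
  decide (a.1 < b.1) || (!decide (b.1 < a.1) && decide (a.2 < b.2))

def lexLe (a b : String × Int) : Prop := ¬ lexLt b a

theorem lexLtb_iff (a b : String × Int) : lexLtb a b = true ↔ lexLt a b := by
  rcases lt_trichotomy a.1 b.1 with h | h | h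
  · simp [lexLtb, lexLt, h, asymm h]
  · simp [lexLtb, lexLt, h]
  · simp [lexLtb, lexLt, h, asymm h, ne_of_gt h]

theorem lexLt_asymm {a b : String × Int} (h : lexLt a b) : ¬ lexLt b a := by
  rcases h with h | ⟨h1, h2⟩
  · rintro (h' | ⟨h1', _⟩)
    · exact absurd h (asymm h')
    · exact absurd h (by rw [h1']; exact lt_irrefl _)
  · rintro (h' | ⟨h1', h2'⟩)
    · exact absurd h' (by rw [h1]; exact lt_irrefl _)
    · omega

theorem lexLt_trans {a b c : String × Int} (h1 : lexLt a b) (h2 : lexLt b c) : lexLt a c := by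
  rcases h1 with h1 | ⟨h1a, h1b⟩ <;> rcases h2 with h2 | ⟨h2a, h2b⟩
  · exact Or.inl (lt_trans h1 h2)
  · exact Or.inl (h2a ▸ h1)
  · exact Or.inl (h1a ▸ h2)
  · exact Or.inr ⟨h1a.trans h2a, by omega⟩

theorem lexLt_total (a b : String × Int) : lexLt a b ∨ a = b ∨ lexLt b a := by
  rcases lt_trichotomy a.1 b.1 with h | h | h
  · exact Or.inl (Or.inl h)
  · rcases lt_trichotomy a.2 b.2 with h2 | h2 | h2
    · exact Or.inl (Or.inr ⟨h, h2⟩)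
    · exact Or.inr (Or.inl (Prod.ext h h2))
    · exact Or.inr (Or.inr (Or.inr ⟨h.symm, h2⟩))
  · exact Or.inr (Or.inr (Or.inl h))

theorem insertBy_pairwise_lexLe (x : String × Int) :
    ∀ l : List (String × Int), l.Pairwise lexLe →
      (PySem.List.insertBy lexLtb x l).Pairwise lexLe := by
  intro l
  induction l with
  | nil =>
    intro _
    exact List.pairwise_singleton ..
  | cons y ys ih =>
    intro hp
    rw [List.pairwise_cons] at hp
    show (if lexLtb x y = true then x :: y :: ys else y :: PySem.List.insertBy lexLtb x ys).Pairwise lexLe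
    by_cases hxy : lexLtb x y = true
    · rw [if_pos hxy]
      have hlt : lexLt x y := (lexLtb_iff ..).mp hxy
      refine List.pairwise_cons.mpr ⟨?_, List.pairwise_cons.mpr hp⟩
      intro z hz
      rcases List.mem_cons.mp hz with rfl | hz
      · exact lexLt_asymm hlt
      · intro hzx
        exact hp.1 z hz (lexLt_trans hzx hlt)
    · rw [if_neg hxy]
      refine List.pairwise_cons.mpr ⟨?_, ih hp.2⟩
      intro z hz
      rcases (PySem.List.mem_insertBy ..).mp hz with rfl | hz
      · exact fun hlt => hxy ((lexLtb_iff ..).mpr hlt)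
      · exact hp.1 z hz


theorem foldl_insertBy_pairwise (xs : List (String × Int)) :
    ∀ acc : List (String × Int), acc.Pairwise lexLe →
      (xs.foldl (fun acc x => PySem.List.insertBy lexLtb x acc) acc).Pairwise lexLe := by
  induction xs with
  | nil => intro acc h; exact h
  | cons x xs ih =>
    intro acc h
    exact ih _ (insertBy_pairwise_lexLe x acc h)

theorem bPairs_unfold (avt : List (List String)) (pad : String) (j : Int) :
    bPairs avt pad j
      = (votesOf pad j (PySem.List.enumerate avt 0)).foldl
          (fun acc x => PySem.List.insertBy lexLtb x acc) [] := rfl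

theorem bPairs_perm (avt : List (List String)) (pad : String) (j : Int) :
    (bPairs avt pad j).Perm (votesOf pad j (PySem.List.enumerate avt 0)) :=
  PySem.List.sorted2_perm _ _ _ _

theorem votes_nodup (avt : List (List String)) (pad : String) (j : Int) :
    (votesOf pad j (PySem.List.enumerate avt 0)).Nodup := by
  have h := votes_snd_pairwise avt pad j
  rw [List.pairwise_map] at h
  exact h.imp (fun hlt => by intro he; rw [he] at hlt; omega)

theorem bPairs_pairwise (avt : List (List String)) (pad : String) (j : Int) :
    (bPairs avt pad j).Pairwise lexLt := by
  have h1 : (bPairs avt pad j).Pairwise lexLe := by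
    rw [bPairs_unfold]
    exact foldl_insertBy_pairwise _ [] (List.Pairwise.nil)
  have h2 : (bPairs avt pad j).Nodup :=
    ((bPairs_perm avt pad j).nodup_iff).mpr (votes_nodup avt pad j)
  refine (h1.and h2).imp ?_
  rintro a b ⟨hle, hne⟩
  rcases lexLt_total a b with h | h | h
  · exact h
  · exact absurd h hne
  · exact absurd h hle

theorem dropWhile_ne_head (t : String) (i : Int) (rest : List (String × Int))
    (hpw : ((t, i) :: rest).Pairwise lexLt) :
    ∀ q ∈ rest.dropWhile (fun q => q.1 == t), q.1 ≠ t := by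
  cases hre : rest.dropWhile (fun q => q.1 == t) with
  | nil => intro q hq; cases hq
  | cons h0 tl =>
    have hhead := List.head?_dropWhile_not (fun q : String × Int => q.1 == t) rest
    rw [hre] at hhead
    have hh0 : h0.1 ≠ t := by simpa using hhead
    have hsub : (h0 :: tl).Sublist rest := hre ▸ List.dropWhile_sublist _
    have hpwc := List.pairwise_cons.mp hpw
    have hth0 : lexLt (t, i) h0 := hpwc.1 h0 (hsub.mem (List.mem_cons_self ..))
    have hlt : t < h0.1 := by
      rcases hth0 with h | ⟨h, _⟩
      · exact h
      · exact absurd h.symm hh0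
    have hpwr : (h0 :: tl).Pairwise lexLt := hre ▸ (hpwc.2.sublist (List.dropWhile_sublist _))
    intro q hq
    rcases List.mem_cons.mp hq with rfl | hq
    · exact hh0
    · have hq' : lexLt h0 q := (List.pairwise_cons.mp hpwr).1 q hq
      intro hqt
      rcases hq' with h | ⟨h, _⟩
      · rw [hqt] at h
        exact absurd (lt_trans hlt h) (lt_irrefl _)
      · rw [hqt] at h
        exact absurd (h ▸ hlt) (lt_irrefl _)

-- run-length grouping of a strictly lex-sorted list: distinct tokens, exact counts,
-- and each group carries the minimal version index of its token
theorem bGroups_spec : ∀ S : List (String × Int), S.Pairwise lexLt →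
    ((bGroups S).map (fun g => g.1)).Nodup ∧
    (∀ t, t ∈ (bGroups S).map (fun g => g.1) ↔ t ∈ S.map Prod.fst) ∧
    (∀ g ∈ bGroups S, (g.1, g.2.2) ∈ S ∧
      g.2.1 = (S.countP (fun q => q.1 == g.1) : Int) ∧
      ∀ q ∈ S, q.1 = g.1 → g.2.2 ≤ q.2) := by
  intro S
  induction S using bGroups.induct with
  | case1 =>
    refine fun _ => ⟨by simp [bGroups], by simp [bGroups], by simp [bGroups]⟩
  | case2 t i rest ih =>
    intro hpw
    set run := rest.takeWhile (fun q => q.1 == t) with hrun_def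
    set rest' := rest.dropWhile (fun q => q.1 == t) with hrest_def
    have hsplit : run ++ rest' = rest := List.takeWhile_append_dropWhile
    have hrun : ∀ q ∈ run, q.1 = t := by
      intro q hq
      simpa using List.mem_takeWhile_imp hq
    have hpw_cons := List.pairwise_cons.mp hpw
    have hpw_rest' : rest'.Pairwise lexLt :=
      hpw_cons.2.sublist (hrest_def ▸ List.dropWhile_sublist _)
    have hrest' : ∀ q ∈ rest', q.1 ≠ t := by
      rw [hrest_def]
      exact dropWhile_ne_head t i rest hpw
    obtain ⟨hnd, hmem, hfacts⟩ := ih hpw_rest'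
    have hgroups : bGroups ((t, i) :: rest)
        = (t, (1 + run.length : Int), i) :: bGroups rest' := by
      rw [bGroups]
    rw [hgroups]
    have hcount_t : ((t, i) :: rest).countP (fun q => q.1 == t) = 1 + run.length := by
      rw [List.countP_cons, ← hsplit, List.countP_append]
      have h1 : run.countP (fun q => q.1 == t) = run.length :=
        List.countP_eq_length.mpr (fun q hq => by simp [hrun q hq])
      have h2 : rest'.countP (fun q => q.1 == t) = 0 :=
        List.countP_eq_zero.mpr (fun q hq => by simp [hrest' q hq])
      simp [h1, h2]
      omega
    refine ⟨?_, ?_, ?_⟩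
    · rw [List.map_cons]
      refine List.nodup_cons.mpr ⟨?_, hnd⟩
      intro hmem'
      obtain ⟨q, hq, hqt⟩ := List.mem_map.mp ((hmem t).mp hmem')
      exact hrest' q hq hqt
    · intro t'
      rw [List.map_cons, List.mem_cons, hmem t', List.map_cons, List.mem_cons]
      constructor
      · rintro (rfl | h)
        · exact Or.inl rfl
        · refine Or.inr ?_
          rw [← hsplit, List.map_append, List.mem_append]
          exact Or.inr h
      · rintro (rfl | h)
        · exact Or.inl rfl
        · rw [← hsplit, List.map_append, List.mem_append] at h
          rcases h with h | h
          · obtain ⟨q, hq, rfl⟩ := List.mem_map.mp h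
            exact Or.inl (hrun q hq)
          · exact Or.inr h
    · intro g hg
      rcases List.mem_cons.mp hg with rfl | hg
      · refine ⟨List.mem_cons_self .., by rw [hcount_t]; push_cast; ring, ?_⟩
        intro q hq hq1
        rcases List.mem_cons.mp hq with rfl | hq
        · exact le_refl _
        · rcases List.mem_append.mp (by rw [hsplit]; exact hq) with hqr | hqr
          · have := hpw_cons.1 q ((hsplit ▸ List.mem_append.mpr (Or.inl hqr)))
            rcases this with h | ⟨_, h⟩
            · exact absurd (hq1 ▸ h) (lt_irrefl _)
            · exact le_of_lt h
          · exact absurd hq1 (hrest' q hqr)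
      · obtain ⟨hg1, hg2, hg3⟩ := hfacts g hg
        have hgt : g.1 ≠ t := by
          have hm0 : g.1 ∈ (bGroups rest').map (fun g => g.1) := List.mem_map_of_mem hg
          obtain ⟨q, hq, hqt⟩ := List.mem_map.mp ((hmem g.1).mp hm0)
          exact hqt ▸ hrest' q hq
        refine ⟨?_, ?_, ?_⟩
        · exact List.mem_cons_of_mem _ (hsplit ▸ List.mem_append.mpr (Or.inr hg1))
        · rw [hg2]
          congr 1
          rw [List.countP_cons, ← hsplit, List.countP_append]
          have h1 : run.countP (fun q => q.1 == g.1) = 0 :=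
            List.countP_eq_zero.mpr (fun q hq => by
              simp [hrun q hq]
              exact fun h => hgt h.symm)
          have h2 : ((t, i).1 == g.1) = false := by
            simp only [beq_eq_false_iff_ne]
            exact fun h => hgt h.symm
          simp [h1, h2]
        · intro q hq hq1
          rcases List.mem_cons.mp hq with rfl | hq
          · exact absurd hq1.symm hgt
          · rcases List.mem_append.mp (by rw [hsplit]; exact hq) with hqr | hqr
            · exact absurd (hq1.symm.trans (hrun q hqr)) hgt
            · exact hg3 q hqr hq1

-- membership in the column vote list, concretely
theorem mem_votes (avt : List (List String)) (pad : String) (j : Int) (v : String × Int) :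
    v ∈ votesOf pad j (PySem.List.enumerate avt 0)
      ↔ ∃ (k : Nat) (h : k < avt.length),
          (colCond pad j (k, avt[k]) = true ∧ v = (PySem.List.pyGetD avt[k] j "", (k : Int))) := by
  unfold votesOf
  rw [List.mem_map]
  constructor
  · rintro ⟨p, hp, rfl⟩
    rw [List.mem_filter] at hp
    obtain ⟨hp1, hp2⟩ := hp
    obtain ⟨k, hk, rfl⟩ := (PySem.List.mem_enumerate_iff ..).mp hp1
    exact ⟨k, hk, by simpa using hp2, by simp⟩
  · rintro ⟨k, hk, hc, rfl⟩
    exact ⟨((k : Int), avt[k]), List.mem_filter.mpr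
      ⟨(PySem.List.mem_enumerate_iff ..).mpr ⟨k, hk, by simp⟩, by simpa using hc⟩, rfl⟩

theorem find?_eq_some_of_unique {α : Type} (l : List α) (p : α → Bool) (v : α)
    (hv : v ∈ l) (hpv : p v = true) (huniq : ∀ a ∈ l, p a = true → a = v) :
    l.find? p = some v := by
  induction l with
  | nil => cases hv
  | cons x xs ih =>
    by_cases hx : p x = true
    · have hxv : x = v := huniq x (List.mem_cons_self ..) hx
      subst hxv
      exact List.find?_cons_of_pos hx
    · rw [List.find?_cons_of_neg (by simpa using hx)]
      rcases List.mem_cons.mp hv with rfl | hv'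
      · exact absurd hpv hx
      · exact ih hv' (fun a ha hpa => huniq a (List.mem_cons_of_mem _ ha) hpa)

-- the tie-breaker version's token, in closed form (B's direct lookup)
theorem lastTb_closed (avt : List (List String)) (pad : String) (tb : Int) (j : Int) :
    lastTb tb (votesOf pad j (PySem.List.enumerate avt 0)) none
      = (if decide (0 ≤ tb) && decide (tb < PySem.List.len avt) then
           (let trow := PySem.List.pyGetD avt tb []
            if decide (j < PySem.List.len trow) && decide (PySem.List.pyGetD trow j "" ≠ pad) then
              some (PySem.List.pyGetD trow j "")
            else none)
         else none) := by
  have hinc := votes_snd_pairwise avt pad j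
  rw [lastTb_eq_find tb _ hinc]
  have hsnd_uniq : ∀ a ∈ votesOf pad j (PySem.List.enumerate avt 0),
      ∀ b ∈ votesOf pad j (PySem.List.enumerate avt 0), a.2 = b.2 → a = b := by
    intro a ha b hb hab
    have hnd : ((votesOf pad j (PySem.List.enumerate avt 0)).map Prod.snd).Nodup :=
      hinc.imp (fun h => by omega)
    exact List.inj_on_of_nodup_map hnd ha hb hab
  rw [PySem.List.len_eq]
  by_cases h1 : (0 ≤ tb ∧ tb < (avt.length : Int))
  · have hk : tb.toNat < avt.length := by omega
    have htbk : ((tb.toNat : Nat) : Int) = tb := by omega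
    have htrow : PySem.List.pyGetD avt tb [] = avt[tb.toNat] :=
      PySem.List.pyGetD_eq_getElem avt [] (by omega) (by omega)
    rw [htrow]
    by_cases h2 : (colCond pad j (tb.toNat, avt[tb.toNat]) = true)
    · have hvm : (PySem.List.pyGetD avt[tb.toNat] j "", (tb.toNat : Int))
          ∈ votesOf pad j (PySem.List.enumerate avt 0) :=
        (mem_votes ..).mpr ⟨tb.toNat, hk, h2, rfl⟩
      have hfind := find?_eq_some_of_unique _ (fun v => v.2 == tb)
        (PySem.List.pyGetD avt[tb.toNat] j "", (tb.toNat : Int)) hvm (by simp [htbk])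
        (by
          intro a ha hpa
          refine hsnd_uniq a ha _ hvm ?_
          simp at hpa
          simp [hpa, htbk])
      rw [hfind]
      have hc := h2
      unfold colCond at hc
      simp only [decide_eq_true_eq, Bool.and_eq_true, PySem.List.len_eq] at hc
      simp [h1, hc.1, hc.2, htbk, PySem.List.len_eq]
    · have hfind : (votesOf pad j (PySem.List.enumerate avt 0)).find? (fun v => v.2 == tb)
          = none := by
        rw [List.find?_eq_none]
        intro v hv
        obtain ⟨k, hk', hck, rfl⟩ := (mem_votes ..).mp hv
        simp only [beq_iff_eq]
        intro hkeq
        apply h2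
        have hkt : k = tb.toNat := by omega
        subst hkt
        exact hck
      rw [hfind]
      have hc2 : ¬(decide (j < PySem.List.len avt[tb.toNat])
          && decide (PySem.List.pyGetD avt[tb.toNat] j "" ≠ pad)) = true := by
        intro hcc
        exact h2 (by unfold colCond; simpa using hcc)
      simp only [Option.map_none]
      rw [if_pos (by simp [h1.1, h1.2]), if_neg hc2]
  · have hfind : (votesOf pad j (PySem.List.enumerate avt 0)).find? (fun v => v.2 == tb)
        = none := by
      rw [List.find?_eq_none]
      intro v hv
      obtain ⟨k, hk', hck, rfl⟩ := (mem_votes ..).mp hv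
      simp only [beq_iff_eq]
      intro hkeq
      exact h1 (by constructor <;> omega)
    rw [hfind]
    rw [if_neg (by simpa using fun ha hb => h1 ⟨ha, hb⟩)]
    rfl

-- key dominance: strictly larger composite key ⇔ bKeyGt in one direction only
theorem keyGt_of_dom (tr : Option String) (g h : String × Int × Int)
    (hlt : h.2.1 < g.2.1
      ∨ (h.2.1 = g.2.1 ∧ ((bFlag tr h.1 = false ∧ bFlag tr g.1 = true)
          ∨ (bFlag tr h.1 = bFlag tr g.1 ∧ g.2.2 < h.2.2)))) :
    bKeyGt tr g h = true ∧ bKeyGt tr h g = false := by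
  unfold bKeyGt
  rcases hlt with h1 | ⟨h1, h2 | h2⟩
  · constructor
    · simp [h1]
    · simp only [Bool.or_eq_false_iff, Bool.and_eq_false_iff]
      constructor
      · simpa using (by omega : ¬ g.2.1 < h.2.1)
      · exact Or.inl (by simpa using (by omega : ¬ h.2.1 = g.2.1))
  · constructor
    · simp [h1, h2.1, h2.2]
    · simp [h1, h2.1, h2.2]
  · constructor
    · simp [h1, h2.1]
      omega
    · simp [h1, h2.1]
      omega

theorem bMaxBy_eq (tr : Option String) (gstar : String × Int × Int) :
    ∀ (l : List (String × Int × Int)) (b : String × Int × Int),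
      (b = gstar ∨ gstar ∈ l) →
      (∀ x, (x = b ∨ x ∈ l) → x ≠ gstar → bKeyGt tr gstar x = true ∧ bKeyGt tr x gstar = false) →
      bMaxBy tr b l = gstar := by
  intro l
  induction l with
  | nil =>
    rintro b (rfl | h) _
    · rfl
    · cases h
  | cons h l ih =>
    intro b hb hdom
    show bMaxBy tr (if bKeyGt tr h b then h else b) l = gstar
    by_cases hh : h = gstar
    · subst hh
      have hb' : (if bKeyGt tr h b then h else b) = h := by
        by_cases hbh : b = h
        · subst hbh; split <;> rfl
        · simp only [(hdom b (Or.inl rfl) hbh).1, if_true]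
      rw [hb']
      exact ih h (Or.inl rfl) (fun x hx => hdom x (by
        rcases hx with rfl | hx
        · exact Or.inr (List.mem_cons_self ..)
        · exact Or.inr (List.mem_cons_of_mem _ hx)))
    · have hb2 : (b = gstar ∨ gstar ∈ l) := by
        rcases hb with rfl | hb
        · exact Or.inl rfl
        · rcases List.mem_cons.mp hb with hcl | hcl
          · exact absurd hcl.symm hh
          · exact Or.inr hcl
      have hnext : (if bKeyGt tr h b then h else b) = gstar ∨ gstar ∈ l := by
        rcases hb2 with rfl | hgl
        · left
          have hfb := (hdom h (Or.inr (List.mem_cons_self ..)) hh).2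
          rw [if_neg (by simp [hfb])]
        · exact Or.inr hgl
      refine ih _ hnext ?_
      intro x hx hxg
      refine hdom x ?_ hxg
      rcases hx with rfl | hx
      · by_cases hkk : bKeyGt tr h b = true
        · rw [if_pos hkk]; exact Or.inr (List.mem_cons_self ..)
        · rw [if_neg hkk]; exact Or.inl rfl
      · exact Or.inr (List.mem_cons_of_mem _ hx)

-- ======== the column equivalence for B ========

-- first match in the vote list has the minimal version index of its token
theorem find?_fst_min (votes : List (String × Int))
    (hinc : (votes.map Prod.snd).Pairwise (· < ·)) (a : String) (v : String × Int)
    (hf : votes.find? (fun u => u.1 == a) = some v) :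
    ∀ q ∈ votes, q.1 = a → v.2 ≤ q.2 := by
  rw [List.find?_eq_some_iff_append] at hf
  obtain ⟨hpv, as, bs, rfl, has⟩ := hf
  have hpl : (as ++ v :: bs).Pairwise (fun x y : String × Int => x.2 < y.2) := by
    rw [← List.pairwise_map (f := Prod.snd)]; exact hinc
  intro q hq hqa
  rcases List.mem_append.mp hq with hqs | hqs
  · exact absurd (by simpa using hqa) (by simpa using has q hqs)
  · rcases List.mem_cons.mp hqs with rfl | hqs
    · exact le_refl _
    · exact le_of_lt ((List.pairwise_cons.mp (List.pairwise_append.mp hpl).2.1).1 q hqs)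

theorem colB_eq (avt : List (List String)) (pad : String) (tb : Int) (strat tiePh : String)
    (acc : List String) (j : Int) :
    bColStep avt pad tb strat tiePh acc j = specColStep avt pad tb strat tiePh acc j := by
  have hinc := votes_snd_pairwise avt pad j
  unfold bColStep specColStep
  rw [specGather_eq]
  set votes := votesOf pad j (PySem.List.enumerate avt 0) with hvdef
  dsimp only
  cases hSc : bPairs avt pad j with
  | nil =>
    have hperm0 := bPairs_perm avt pad j
    rw [hSc, ← hvdef] at hperm0
    have hvnil : votes = [] := hperm0.symm.eq_nil
    rw [hvnil]
    simp [PySem.Dict.items_counter, PySem.Set.ofList_nil]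
  | cons p ps =>
    dsimp only
    -- ===== groundwork =====
    have hSperm : (p :: ps).Perm votes := by
      have h := bPairs_perm avt pad j
      rw [hSc, ← hvdef] at h
      exact h
    have hSpw : ((p :: ps) : List (String × Int)).Pairwise lexLt := by
      have h := bPairs_pairwise avt pad j
      rw [hSc] at h
      exact h
    obtain ⟨hnd, hmemG, hfacts⟩ := bGroups_spec (p :: ps) hSpw
    have hvne : votes ≠ [] := fun h0 => by
      rw [h0] at hSperm
      exact absurd hSperm.eq_nil (by simp)
    have hnil : votes.map Prod.fst ≠ [] := by simpa using hvne
    have hsnd_uniq : ∀ a ∈ votes, ∀ b ∈ votes, a.2 = b.2 → a = b := by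
      intro a ha b hb hab
      have hnd2 : (votes.map Prod.snd).Nodup := hinc.imp (fun h => by omega)
      exact List.inj_on_of_nodup_map hnd2 ha hb hab
    -- token-level facts about the groups
    have hcnt_map : ∀ t : String, votes.countP (fun q => q.1 == t)
        = (votes.map Prod.fst).count t := by
      intro t
      rw [List.count_eq_countP, List.countP_map]
      rfl
    have hgmem : ∀ g ∈ bGroups (p :: ps), (g.1, g.2.2) ∈ votes :=
      fun g hg => hSperm.mem_iff.mp (hfacts g hg).1
    have hgcount : ∀ g ∈ bGroups (p :: ps), g.2.1 = ((votes.map Prod.fst).count g.1 : Int) := by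
      intro g hg
      rw [(hfacts g hg).2.1, hSperm.countP_eq, hcnt_map]
    have hgmin : ∀ g ∈ bGroups (p :: ps), ∀ q ∈ votes, q.1 = g.1 → g.2.2 ≤ q.2 :=
      fun g hg q hq => (hfacts g hg).2.2 q (hSperm.mem_iff.mpr hq)
    have hgfind : ∀ g ∈ bGroups (p :: ps),
        votes.find? (fun u => u.1 == g.1) = some (g.1, g.2.2) := by
      intro g hg
      have hmem1 : g.1 ∈ votes.map Prod.fst := List.mem_map_of_mem (hgmem g hg)
      obtain ⟨v, hv, hv1⟩ := find_fst_some votes g.1 hmem1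
      have hvm : v ∈ votes := List.mem_of_find?_eq_some hv
      have h1 : g.2.2 ≤ v.2 := hgmin g hg v hvm hv1
      have h2 : v.2 ≤ g.2.2 := find?_fst_min votes hinc g.1 v hv (g.1, g.2.2) (hgmem g hg) rfl
      have hveq : v = (g.1, g.2.2) := Prod.ext hv1 (by omega)
      rw [hv, hveq]
    have hGt_mem : ∀ t, t ∈ (bGroups (p :: ps)).map (fun g => g.1) ↔ t ∈ votes.map Prod.fst :=
      fun t => (hmemG t).trans (hSperm.map Prod.fst).mem_iff
    have hfst_inj : ∀ g ∈ bGroups (p :: ps), ∀ h ∈ bGroups (p :: ps), g.1 = h.1 → g = h :=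
      fun g hg h hh => List.inj_on_of_nodup_map hnd hg hh
    have hmins : ∀ g ∈ bGroups (p :: ps), ∀ h ∈ bGroups (p :: ps), g ≠ h → g.2.2 ≠ h.2.2 := by
      intro g hg h hh hne heq
      have := hsnd_uniq (g.1, g.2.2) (hgmem g hg) (h.1, h.2.2) (hgmem h hh) heq
      exact hne (hfst_inj g hg h hh (by simpa using congrArg Prod.fst this))
    have hcov : ∀ t ∈ votes.map Prod.fst, ∃ g ∈ bGroups (p :: ps), g.1 = t := by
      intro t ht
      obtain ⟨g, hg, hgt⟩ := List.mem_map.mp ((hGt_mem t).mpr ht)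
      exact ⟨g, hg, hgt⟩
    -- spec-side counter facts
    have hS : PySem.Set.ofList (votes.map Prod.fst) ≠ [] := by
      intro hS0
      obtain ⟨a, l, htk⟩ : ∃ a l, votes.map Prod.fst = a :: l := by
        cases htk : votes.map Prod.fst with
        | nil => exact absurd htk hnil
        | cons a l => exact ⟨a, l, rfl⟩
      have ha : a ∈ PySem.Set.ofList (votes.map Prod.fst) :=
        (PySem.Set.mem_ofList ..).mpr (by rw [htk]; exact List.mem_cons_self ..)
      rw [hS0] at ha
      cases ha
    have hitems := PySem.Dict.items_counter (votes.map Prod.fst)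
    have hitems_ne : (PySem.Dict.counter (votes.map Prod.fst)).items ≠ [] := by
      rw [hitems]
      simpa using hS
    rw [if_neg hitems_ne]
    -- spec max
    have hvals : (PySem.Dict.counter (votes.map Prod.fst)).values
        = (PySem.Dict.counter (votes.map Prod.fst)).items.map Prod.snd := rfl
    obtain ⟨M, hM⟩ : ∃ M, PySem.List.max?
        (PySem.Dict.counter (votes.map Prod.fst)).values (fun c => c) = some M := by
      cases hv0 : PySem.List.max? (PySem.Dict.counter (votes.map Prod.fst)).values
          (fun c => c) with
      | none =>
        rw [PySem.List.max?_eq_none_iff, hvals, List.map_eq_nil_iff] at hv0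
        exact absurd hv0 hitems_ne
      | some v => exact ⟨v, rfl⟩
    have hMub : ∀ t ∈ PySem.Set.ofList (votes.map Prod.fst),
        ((votes.map Prod.fst).count t : Int) ≤ M := by
      intro t ht
      refine PySem.List.max?_isMax hM _ ?_
      rw [hvals, hitems, List.map_map]
      exact List.mem_map.mpr ⟨t, ht, rfl⟩
    have hMt : ∃ t ∈ PySem.Set.ofList (votes.map Prod.fst),
        ((votes.map Prod.fst).count t : Int) = M := by
      have hmm := PySem.List.max?_mem hM
      rw [hvals, hitems, List.map_map] at hmm
      obtain ⟨t, ht, hte⟩ := List.mem_map.mp hmm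
      exact ⟨t, ht, hte⟩
    rw [hM]
    -- B max
    have hGne : bGroups (p :: ps) ≠ [] := by
      intro h0
      have hp1 : p.1 ∈ votes.map Prod.fst :=
        List.mem_map_of_mem (hSperm.mem_iff.mp (List.mem_cons_self ..))
      have := (hGt_mem p.1).mpr hp1
      rw [h0] at this
      cases this
    obtain ⟨M', hM'⟩ : ∃ M', PySem.List.max?
        ((bGroups (p :: ps)).map (fun g => g.2.1)) (fun c => c) = some M' := by
      cases hv0 : PySem.List.max? ((bGroups (p :: ps)).map (fun g => g.2.1)) (fun c => c) with
      | none =>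
        rw [PySem.List.max?_eq_none_iff, List.map_eq_nil_iff] at hv0
        exact absurd hv0 hGne
      | some v => exact ⟨v, rfl⟩
    have hM'ub : ∀ g ∈ bGroups (p :: ps), g.2.1 ≤ M' :=
      fun g hg => PySem.List.max?_isMax hM' _ (List.mem_map_of_mem hg)
    have hM'mem : ∃ g ∈ bGroups (p :: ps), g.2.1 = M' := by
      have hmm := PySem.List.max?_mem hM'
      obtain ⟨g, hg, hge⟩ := List.mem_map.mp hmm
      exact ⟨g, hg, hge⟩
    have hMM' : M' = M := by
      obtain ⟨t, ht, hte⟩ := hMt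
      obtain ⟨g1, hg1, hg1t⟩ := hcov t ((PySem.Set.mem_ofList ..).mp ht)
      obtain ⟨g2, hg2, hg2e⟩ := hM'mem
      have h1 : M ≤ M' := by
        have := hM'ub g1 hg1
        rw [hgcount g1 hg1, hg1t, hte] at this
        exact this
      have h2 : M' ≤ M := by
        have := hMub g2.1 ((PySem.Set.mem_ofList ..).mpr
          (List.mem_map_of_mem (hgmem g2 hg2)))
        rw [← hgcount g2 hg2, hg2e] at this
        exact this
      omega
    rw [hM', Option.getD_some, Option.getD_some, hMM']
    -- tied count & top list
    have hsum_ones : ∀ l : List (String × Int × Int),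
        ((l.map (fun _ => (1 : Int))).sum = (l.length : Int)) := by
      intro l
      induction l with
      | nil => simp
      | cons x xs ih => simp; omega
    set F := (PySem.Set.ofList (votes.map Prod.fst)).filter
      (fun t => ((votes.map Prod.fst).count t : Int) == M) with hFdef
    have hGtperm : ((bGroups (p :: ps)).map (fun g => g.1)).Perm
        (PySem.Set.ofList (votes.map Prod.fst)) := by
      refine (List.perm_ext_iff_of_nodup hnd (PySem.Set.nodup_ofList _)).mpr ?_
      intro t
      rw [hGt_mem t, PySem.Set.mem_ofList]
    have hcands_len : ((bGroups (p :: ps)).filter (fun g => g.2.1 == M)).length = F.length := by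
      rw [← List.countP_eq_length_filter, ← List.countP_eq_length_filter]
      have h1 : (bGroups (p :: ps)).countP (fun g => g.2.1 == M)
          = (bGroups (p :: ps)).countP (fun g => (((votes.map Prod.fst).count g.1 : Int)) == M) :=
        List.countP_congr (fun g hg => by rw [hgcount g hg])
      rw [h1]
      have h2 : (bGroups (p :: ps)).countP
            (fun g => (((votes.map Prod.fst).count g.1 : Int)) == M)
          = ((bGroups (p :: ps)).map (fun g => g.1)).countP
              (fun t => (((votes.map Prod.fst).count t : Int)) == M) := by
        rw [List.countP_map]
        rfl
      rw [h2, hGtperm.countP_eq]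
    have htopF : (((PySem.Dict.counter (votes.map Prod.fst)).items.filter
          (fun pr => pr.2 == M)).map (fun pr => pr.1)) = F := by
      rw [hitems, List.filter_map, List.map_map]
      have : ((fun pr : String × Int => pr.2 == M) ∘
          (fun k => (k, ((votes.map Prod.fst).count k : Int))))
          = (fun t => (((votes.map Prod.fst).count t : Int)) == M) := rfl
      rw [this]
      have hcomp : ((fun pr : String × Int => pr.1) ∘
          (fun k => (k, ((votes.map Prod.fst).count k : Int)))) = fun k => k := rfl
      rw [hcomp, List.map_id']
    rw [htopF]
    have hFne : F ≠ [] := by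
      obtain ⟨t, ht, hte⟩ := hMt
      intro h0
      have : t ∈ F := List.mem_filter.mpr ⟨ht, by simp [hte]⟩
      rw [h0] at this
      cases this
    obtain ⟨t0, F', hF0⟩ : ∃ t0 F', F = t0 :: F' := by
      cases hF0 : F with
      | nil => exact absurd hF0 hFne
      | cons a l => exact ⟨a, l, rfl⟩
    have hFmem : ∀ t, t ∈ F ↔ (t ∈ votes.map Prod.fst
        ∧ ((votes.map Prod.fst).count t : Int) = M) := by
      intro t
      rw [hFdef, List.mem_filter, PySem.Set.mem_ofList]
      simp
    -- group lookup for tokens of F, and t0 is the minimal-version max-count token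
    have hgroupF : ∀ t ∈ F, ∃ g ∈ (bGroups (p :: ps)).filter (fun g => g.2.1 == M), g.1 = t := by
      intro t ht
      obtain ⟨htm, htc⟩ := (hFmem t).mp ht
      obtain ⟨g, hg, hgt⟩ := hcov t htm
      refine ⟨g, List.mem_filter.mpr ⟨hg, ?_⟩, hgt⟩
      rw [hgcount g hg, hgt, htc]
      simp
    have hFpw : F.Pairwise (fun a b => (votes.map Prod.fst).idxOf a
        < (votes.map Prod.fst).idxOf b) :=
      (ofList_pairwise_idxOf (votes.map Prod.fst)).sublist List.filter_sublist
    -- the E-winner: min version index among max-count groups is the token top[0]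
    obtain ⟨gE, hgE⟩ : ∃ gE, PySem.List.min?
        ((bGroups (p :: ps)).filter (fun g => g.2.1 == M)) (fun g => g.2.2) = some gE := by
      cases hv0 : PySem.List.min? ((bGroups (p :: ps)).filter (fun g => g.2.1 == M))
          (fun g => g.2.2) with
      | none =>
        rw [PySem.List.min?_eq_none_iff] at hv0
        obtain ⟨g, hg, _⟩ := hgroupF t0 (hF0 ▸ List.mem_cons_self ..)
        rw [hv0] at hg
        cases hg
      | some v => exact ⟨v, rfl⟩
    have hgE_memf := PySem.List.min?_mem hgE
    have hgE_mem : gE ∈ bGroups (p :: ps) := List.mem_of_mem_filter hgE_memf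
    have hgE_cnt : gE.2.1 = M := by simpa using List.of_mem_filter hgE_memf
    have hgE_min : ∀ h ∈ (bGroups (p :: ps)).filter (fun g => g.2.1 == M),
        gE.2.2 ≤ h.2.2 := PySem.List.min?_isMin hgE
    have hE1 : gE.1 = t0 := by
      by_contra hne
      obtain ⟨g1, hg1f, hg1t⟩ := hgroupF t0 (hF0 ▸ List.mem_cons_self ..)
      have hg1 : g1 ∈ bGroups (p :: ps) := List.mem_of_mem_filter hg1f
      have hgne : gE ≠ g1 := fun h => hne (h ▸ hg1t)
      have hlt1 : gE.2.2 < g1.2.2 :=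
        lt_of_le_of_ne (hgE_min g1 hg1f) (hmins gE hgE_mem g1 hg1 hgne)
      -- but t0 comes first in first-occurrence order among max-count tokens
      have hgEF : gE.1 ∈ F := (hFmem gE.1).mpr
        ⟨List.mem_map_of_mem (hgmem gE hgE_mem), by rw [← hgcount gE hgE_mem, hgE_cnt]⟩
      have hgEF' : gE.1 ∈ F' := by
        rcases List.mem_cons.mp (hF0 ▸ hgEF) with h | h
        · exact absurd h hne
        · exact h
      have hidx : (votes.map Prod.fst).idxOf t0 < (votes.map Prod.fst).idxOf gE.1 := by
        have := hF0 ▸ hFpw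
        exact (List.pairwise_cons.mp this).1 gE.1 hgEF'
      have hfa := hgfind g1 hg1
      rw [hg1t] at hfa
      have hfb := hgfind gE hgE_mem
      have := find_fst_snd_lt votes hinc t0 gE.1 hidx (t0, g1.2.2) (gE.1, gE.2.2) hfa hfb
      simp at this
      omega
    -- dominance arguments for bMaxBy
    have hdomE : ∀ tr : Option String,
        (tr = none ∨ ∃ t, tr = some t ∧ ¬(t ∈ votes.map Prod.fst
          ∧ ((votes.map Prod.fst).count t : Int) = M)) →
        ∀ h ∈ bGroups (p :: ps), h ≠ gE →
          bKeyGt tr gE h = true ∧ bKeyGt tr h gE = false := by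
      intro tr htr h hh hne
      refine keyGt_of_dom tr gE h ?_
      by_cases hcM : h.2.1 = M
      · have hflag : ∀ x ∈ bGroups (p :: ps), x.2.1 = M → bFlag tr x.1 = false := by
          intro x hx hxc
          rcases htr with rfl | ⟨t, rfl, htc⟩
          · rfl
          · show (x.1 == t) = false
            simp only [beq_eq_false_iff_ne]
            intro hxt
            exact htc ⟨hxt ▸ List.mem_map_of_mem (hgmem x hx),
              by rw [← hxt, ← hgcount x hx, hxc]⟩
        refine Or.inr ⟨by rw [hcM, hgE_cnt], Or.inr ⟨?_, ?_⟩⟩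
        · rw [hflag h hh hcM, hflag gE hgE_mem hgE_cnt]
        · refine lt_of_le_of_ne (hgE_min h (List.mem_filter.mpr ⟨hh, by simp [hcM]⟩)) ?_
          exact hmins gE hgE_mem h hh (fun he => hne he.symm)
      · refine Or.inl ?_
        have h1 : h.2.1 ≤ M := by
          have := hMub h.1 ((PySem.Set.mem_ofList ..).mpr
            (List.mem_map_of_mem (hgmem h hh)))
          rw [← hgcount h hh] at this
          exact this
        rw [hgE_cnt]
        omega
    have hdomP : ∀ t : String, t ∈ votes.map Prod.fst →
        ((votes.map Prod.fst).count t : Int) = M →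
        ∃ gP ∈ bGroups (p :: ps), gP.1 = t ∧
          ∀ h ∈ bGroups (p :: ps), h ≠ gP →
            bKeyGt (some t) gP h = true ∧ bKeyGt (some t) h gP = false := by
      intro t htm htc
      obtain ⟨gP, hgP, hgPt⟩ := hcov t htm
      have hgPc : gP.2.1 = M := by rw [hgcount gP hgP, hgPt, htc]
      refine ⟨gP, hgP, hgPt, ?_⟩
      intro h hh hne
      refine keyGt_of_dom (some t) gP h ?_
      by_cases hcM : h.2.1 = M
      · refine Or.inr ⟨by rw [hcM, hgPc], Or.inl ⟨?_, ?_⟩⟩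
        · show (h.1 == t) = false
          simp only [beq_eq_false_iff_ne]
          intro hht
          exact hne (hfst_inj h hh gP hgP (hht.trans hgPt.symm))
        · show (gP.1 == t) = true
          simp [hgPt]
      · refine Or.inl ?_
        have h1 : h.2.1 ≤ M := by
          have := hMub h.1 ((PySem.Set.mem_ofList ..).mpr
            (List.mem_map_of_mem (hgmem h hh)))
          rw [← hgcount h hh] at this
          exact this
        rw [hgPc]
        omega
    -- groups in cons form
    obtain ⟨g0, gs, hGc⟩ : ∃ g0 gs, bGroups (p :: ps) = g0 :: gs := by
      cases hGc : bGroups (p :: ps) with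
      | nil => exact absurd hGc hGne
      | cons a l => exact ⟨a, l, rfl⟩
    have hmaxE : ∀ tr : Option String,
        (tr = none ∨ ∃ t, tr = some t ∧ ¬(t ∈ votes.map Prod.fst
          ∧ ((votes.map Prod.fst).count t : Int) = M)) →
        (bMaxBy tr g0 gs).1 = t0 := by
      intro tr htr
      have := bMaxBy_eq tr gE gs g0
        (by
          rcases List.mem_cons.mp (hGc ▸ hgE_mem) with h | h
          · exact Or.inl h.symm
          · exact Or.inr h)
        (by
          intro x hx hxne
          refine hdomE tr htr x ?_ hxne
          rw [hGc]
          rcases hx with rfl | hx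
          · exact List.mem_cons_self ..
          · exact List.mem_cons_of_mem _ hx)
      rw [this, hE1]
    have hmaxP : ∀ t : String, t ∈ votes.map Prod.fst →
        ((votes.map Prod.fst).count t : Int) = M →
        (bMaxBy (some t) g0 gs).1 = t := by
      intro t htm htc
      obtain ⟨gP, hgP, hgPt, hdom⟩ := hdomP t htm htc
      have := bMaxBy_eq (some t) gP gs g0
        (by
          rcases List.mem_cons.mp (hGc ▸ hgP) with h | h
          · exact Or.inl h.symm
          · exact Or.inr h)
        (by
          intro x hx hxne
          refine hdom x ?_ hxne
          rw [hGc]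
          rcases hx with rfl | hx
          · exact List.mem_cons_self ..
          · exact List.mem_cons_of_mem _ hx)
      rw [this, hgPt]
    -- the tie-breaker token in closed form
    have hTC := lastTb_closed avt pad tb j
    rw [← hvdef] at hTC
    rw [hTC]
    set TC : Option String := (if decide (0 ≤ tb) && decide (tb < PySem.List.len avt) then
         (let trow := PySem.List.pyGetD avt tb []
          if decide (j < PySem.List.len trow) && decide (PySem.List.pyGetD trow j "" ≠ pad) then
            some (PySem.List.pyGetD trow j "")
          else none)
       else none) with hTCdef
    -- tied / length bookkeeping
    rw [hsum_ones, hcands_len, hGc]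
    dsimp only
    have hFlen1 : 1 ≤ F.length := by rw [hF0]; simp
    -- ===== final case analysis =====
    by_cases hL : F.length = 1
    · -- unique max-count token: both sides emit top[0] = t0
      have hF' : F' = [] := by
        rw [hF0] at hL
        simpa using hL
      have htied : decide ((F.length : Int) > 1) = false := by rw [hL]; simp
      rw [htied]
      simp only [Bool.false_and, Bool.false_eq_true, if_false]
      rw [hF0, hF']
      rw [if_pos (show (([t0] : List String).length == 1) = true from rfl),
        PySem.List.pyGetD_zero_cons]
      -- B's winner is t0 whatever the trusted token is
      by_cases hP : (strat == "prefer_version_idx"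
          && decide (0 ≤ tb) && decide (tb < PySem.List.len avt)) = true
      · rw [if_pos hP]
        try dsimp only
        by_cases hP2 : (decide (j < PySem.List.len (PySem.List.pyGetD avt tb []))
            && decide (PySem.List.pyGetD (PySem.List.pyGetD avt tb []) j "" ≠ pad)) = true
        · rw [if_pos hP2]
          set t := PySem.List.pyGetD (PySem.List.pyGetD avt tb []) j "" with htdef
          by_cases hmax : t ∈ votes.map Prod.fst ∧ ((votes.map Prod.fst).count t : Int) = M
          · rw [hmaxP t hmax.1 hmax.2]
            have htF : t ∈ F := (hFmem t).mpr hmax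
            rw [hF0, hF'] at htF
            have ht0 : t = t0 := by simpa using htF
            rw [ht0]
          · rw [hmaxE (some t) (Or.inr ⟨t, rfl, hmax⟩)]
        · rw [if_neg hP2]
          rw [hmaxE none (Or.inl rfl)]
      · rw [if_neg hP]
        rw [hmaxE none (Or.inl rfl)]

    · -- a genuine tie for the top spot
      have hLgt : 1 < F.length := by omega
      have htied : decide ((F.length : Int) > 1) = true := by
        simp
        omega
      have hlen1 : (F.length == 1) = false := by simp [hL]
      rw [htied, hlen1]
      simp only [Bool.true_and, Bool.false_eq_true, if_false]
      by_cases hO : strat = "omit"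
      · subst hO
        simp
      · have hOb : (strat == "omit") = false := beq_eq_false_iff_ne.mpr hO
        rw [hOb]
        simp only [Bool.false_eq_true, if_false]
        by_cases hPl : strat = "placeholder"
        · subst hPl
          simp
        · have hPlb : (strat == "placeholder") = false := beq_eq_false_iff_ne.mpr hPl
          rw [hPlb]
          simp only [Bool.false_eq_true, if_false]
          by_cases hPr : strat = "prefer_version_idx"
          · subst hPr
            have hPrb : ("prefer_version_idx" == "prefer_version_idx") = true := by decide
            rw [hPrb]
            simp only [Bool.true_and]
            -- B's trusted equals TC here
            by_cases hc1 : (decide (0 ≤ tb) && decide (tb < PySem.List.len avt)) = true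
            · rw [if_pos hc1]
              try dsimp only
              by_cases hc2 : (decide (j < PySem.List.len (PySem.List.pyGetD avt tb []))
                  && decide (PySem.List.pyGetD (PySem.List.pyGetD avt tb []) j "" ≠ pad)) = true
              · rw [if_pos hc2]
                have hTCv : TC = some (PySem.List.pyGetD (PySem.List.pyGetD avt tb []) j "") := by
                  rw [hTCdef, if_pos hc1]
                  dsimp only
                  rw [if_pos hc2]
                rw [hTCv]
                set t := PySem.List.pyGetD (PySem.List.pyGetD avt tb []) j "" with htdef
                try dsimp only
                by_cases hmem : t ∈ F
                · rw [if_pos (by simpa using hmem)]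
                  simp only [Option.getD_some]
                  rw [hmaxP t ((hFmem t).mp hmem).1 ((hFmem t).mp hmem).2]
                · rw [if_neg (by simpa using hmem)]
                  rw [hF0, PySem.List.pyGetD_zero_cons]
                  rw [hmaxE (some t) (Or.inr ⟨t, rfl, fun hc => hmem ((hFmem t).mpr hc)⟩)]
              · rw [if_neg hc2]
                have hTCv : TC = none := by
                  rw [hTCdef, if_pos hc1]
                  dsimp only
                  rw [if_neg hc2]
                rw [hTCv]
                try dsimp only
                rw [if_neg (by simp)]
                rw [hF0, PySem.List.pyGetD_zero_cons]
                rw [hmaxE none (Or.inl rfl)]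
            · rw [if_neg hc1]
              have hTCv : TC = none := by
                rw [hTCdef, if_neg hc1]
              rw [hTCv]
              try dsimp only
              rw [if_neg (by simp)]
              rw [hF0, PySem.List.pyGetD_zero_cons]
              rw [hmaxE none (Or.inl rfl)]
          · have hPrb : (strat == "prefer_version_idx") = false := beq_eq_false_iff_ne.mpr hPr
            rw [hPrb]
            simp only [Bool.false_and, Bool.false_eq_true, if_false]
            rw [hF0, PySem.List.pyGetD_zero_cons]
            rw [hmaxE none (Or.inl rfl)]

-- ===== VERDICT (by name: the statement is the Claim_ definition above) =====
theorem perform_voting_on_aligned_tokens_py_spec : Claim_equal_perform_voting_on_aligned_tokens_py := by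
  intro avt pad tb strat tiePh _
  unfold Spec_perform_voting_on_aligned_tokens_py
  unfold perform_voting_on_aligned_tokens_py perform_voting_on_aligned_tokens_py_alt
  match avt with
  | [] => rfl
  | row0 :: rest =>
    by_cases h0 : row0 = []
    · simp [h0]
    · simp only [if_neg h0]
      refine (PySem.List.foldl_congr_mem _ _ _ _ (fun acc j _ => ?_)).symm
      exact (colA_eq (row0 :: rest) pad tb strat tiePh acc j).symm ▸
        (colB_eq (row0 :: rest) pad tb strat tiePh acc j) ▸ rfl
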